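-- pv_equiv track=rewrite | github.com/dltkdals224/Algorithm | Programmers/Level2/무인도 여행.py | solution
-- ===== SOURCE A (Python) =====
-- from collections import deque
--
-- def solution(maps):
--     answer = []
--
--     row = len(maps)
--     col = len(maps[0])
--     visited = [[False] * col for _ in range(row)]
--
--     def bfs(x, y):
--         dx = [-1,1,0,0]
--         dy = [0,0,-1,1]
--
--         visited[x][y] = True
--
--         queue = deque()
--         queue.append((x,y))
--
--         sum_of_supply = int(maps[x][y])
--
--         while queue:
--             cur_x, cur_y = queue.popleft()
--
--             for i in range(4):
--                 next_x = cur_x + dx[i]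
--                 next_y = cur_y + dy[i]
--                 if next_x >= 0 and next_x < row and next_y >= 0 and next_y < col:
--                     if maps[next_x][next_y] != 'X' and not visited[next_x][next_y]:
--                         visited[next_x][next_y] = True
--                         sum_of_supply += int(maps[next_x][next_y])
--                         queue.append((next_x,next_y))
--
--         answer.append(sum_of_supply)
--
--     for i in range(row):
--         for j in range(col):
--             if maps[i][j] != 'X' and not visited[i][j]:
--                 bfs(i, j)
--
--     return sorted(answer) if answer != [] else [-1]
-- ===== SOURCE B (Python) =====
-- def solution(maps):
--     row = len(maps)
--     col = len(maps[0])
--     n = row * col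
--     parent = list(range(n))
--
--     def find(x):
--         while parent[x] != x:
--             x = parent[x]
--         return x
--
--     def union(a, b):
--         ra, rb = find(a), find(b)
--         if ra < rb:
--             parent[rb] = ra
--         elif rb < ra:
--             parent[ra] = rb
--
--     for i in range(row):
--         for j in range(col):
--             if maps[i][j] != 'X':
--                 if j + 1 < col and maps[i][j + 1] != 'X':
--                     union(i * col + j, i * col + j + 1)
--                 if i + 1 < row and maps[i + 1][j] != 'X':
--                     union(i * col + j, (i + 1) * col + j)
--
--     sums = {}
--     for i in range(row):
--         for j in range(col):
--             if maps[i][j] != 'X':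
--                 r = find(i * col + j)
--                 sums[r] = sums.get(r, 0) + int(maps[i][j])
--
--     values = sorted(sums.values())
--     return values if values else [-1]
-- ===== Notes on version B (the rewrite author's own statement) =====
-- stated objective: alternative
-- what changed: Replaces the BFS flood fill with a shared visited matrix and per-island queue by a union-find (disjoint-set with union-by-minimum-root) over flat cell indices: one grid pass unites each land cell with its right/down land neighbours, a second pass buckets each cell's supply int into its root's dict entry, and the sorted bucket values (or [-1] when no land) are returned.
import Mathlib
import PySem

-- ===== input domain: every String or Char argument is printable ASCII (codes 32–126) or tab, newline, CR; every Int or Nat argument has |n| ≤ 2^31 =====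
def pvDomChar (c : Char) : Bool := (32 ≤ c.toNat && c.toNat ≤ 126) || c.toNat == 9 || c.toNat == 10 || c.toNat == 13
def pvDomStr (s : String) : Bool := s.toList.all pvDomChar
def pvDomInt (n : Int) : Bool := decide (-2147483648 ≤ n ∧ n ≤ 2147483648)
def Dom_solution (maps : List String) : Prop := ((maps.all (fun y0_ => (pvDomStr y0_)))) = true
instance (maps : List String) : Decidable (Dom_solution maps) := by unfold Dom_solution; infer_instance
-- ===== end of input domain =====

-- B replaces A's BFS flood fill (shared visited matrix + per-island queue) by a union-find over
-- flat cell indices with union-by-minimum-root and a root-keyed sum dict; same return value.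

-- helpers shared by both ports (the literal pieces 'maps[i][j]' and 'int(maps[i][j])')
def pvGrid (maps : List String) : List (List Char) := maps.map String.toList
def pvCell (g : List (List Char)) (i j : Nat) : Char := (g.getD i []).getD j 'X'
def pvIntChar (c : Char) : Int := (PySem.Int.ofStr? (String.mk [c])).getD 0

-- ===== PORT A =====
def pvVGet (v : List (List Bool)) (i j : Nat) : Bool := (v.getD i []).getD j true
def pvVSet (v : List (List Bool)) (i j : Nat) : List (List Bool) := v.set i ((v.getD i []).set j true)

-- one direction i of the 'for i in range(4)' neighbour loop inside bfs
def pvStep (g : List (List Char)) (row col : Nat) (c : Nat × Nat)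
    (st : List (List Bool) × List (Nat × Nat) × Int) (dir : Nat) :
    List (List Bool) × List (Nat × Nat) × Int :=
  let dxs : List Int := [-1, 1, 0, 0]
  let dys : List Int := [0, 0, -1, 1]
  let nx : Int := (c.1 : Int) + dxs.getD dir 0
  let ny : Int := (c.2 : Int) + dys.getD dir 0
  if 0 ≤ nx ∧ nx < (row : Int) ∧ 0 ≤ ny ∧ ny < (col : Int) then
    if pvCell g nx.toNat ny.toNat ≠ 'X' ∧ pvVGet st.1 nx.toNat ny.toNat = false then
      (pvVSet st.1 nx.toNat ny.toNat, st.2.1 ++ [(nx.toNat, ny.toNat)],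
       st.2.2 + pvIntChar (pvCell g nx.toNat ny.toNat))
    else st
  else st

-- the 'while queue:' loop (fuel only makes it total; fuel row*col+1 always suffices)
def pvBfsLoop (g : List (List Char)) (row col : Nat) :
    Nat → List (List Bool) → List (Nat × Nat) → Int → List (List Bool) × Int
  | 0, v, _, s => (v, s)
  | fuel+1, v, q, s =>
    match q with
    | [] => (v, s)
    | c :: qt =>
      let st := (List.range 4).foldl (pvStep g row col c) (v, qt, s)
      pvBfsLoop g row col fuel st.1 st.2.1 st.2.2

def pvBfs (g : List (List Char)) (row col : Nat) (v : List (List Bool)) (x y : Nat) :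
    List (List Bool) × Int :=
  pvBfsLoop g row col (row * col + 1) (pvVSet v x y) [(x, y)] (pvIntChar (pvCell g x y))

def solution (maps : List String) : List Int :=
  let g := pvGrid maps
  let row := maps.length
  let col := (g.headD []).length
  let fin := (List.range row).foldl (fun st i =>
      (List.range col).foldl (fun (st : List (List Bool) × List Int) j =>
        if pvCell g i j ≠ 'X' ∧ pvVGet st.1 i j = false then
          let r := pvBfs g row col st.1 i j
          (r.1, st.2 ++ [r.2])
        else st) st)
    (List.replicate row (List.replicate col false), ([] : List Int))
  let answer := fin.2
  if answer ≠ [] then PySem.List.sorted answer (fun x => x) false else [-1]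

-- ===== PORT B =====
-- find(x): walk parent pointers to the root (fuel x+1 suffices: parent[y] ≤ y throughout B)
def pvFindLoop (parent : List Nat) : Nat → Nat → Nat
  | 0, x => x
  | f+1, x => let p := parent.getD x x; if p = x then x else pvFindLoop parent f p

def pvFind (parent : List Nat) (x : Nat) : Nat := pvFindLoop parent (x + 1) x

def pvUnion (parent : List Nat) (a b : Nat) : List Nat :=
  let ra := pvFind parent a
  let rb := pvFind parent b
  if ra < rb then parent.set rb ra
  else if rb < ra then parent.set ra rb
  else parent

def solution_alt (maps : List String) : List Int :=
  let g := pvGrid maps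
  let row := maps.length
  let col := (g.headD []).length
  let parent := (List.range row).foldl (fun par i =>
      (List.range col).foldl (fun (par : List Nat) j =>
        if pvCell g i j ≠ 'X' then
          let par1 := if j + 1 < col ∧ pvCell g i (j+1) ≠ 'X' then
              pvUnion par (i * col + j) (i * col + j + 1) else par
          if i + 1 < row ∧ pvCell g (i+1) j ≠ 'X' then
              pvUnion par1 (i * col + j) ((i+1) * col + j) else par1
        else par) par)
    (List.range (row * col))
  let sums := (List.range row).foldl (fun d i =>
      (List.range col).foldl (fun (d : PySem.Dict Nat Int) j =>
        if pvCell g i j ≠ 'X' then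
          let r := pvFind parent (i * col + j)
          d.insert r (d.getD r 0 + pvIntChar (pvCell g i j))
        else d) d)
    PySem.Dict.empty
  let values := PySem.List.sorted sums.values (fun x => x) false
  if values ≠ [] then values else [-1]

-- ===== PRECONDITION & SPEC =====
-- Pre_ excludes exactly the inputs where Python A raises: the empty list (maps[0] → IndexError),
-- a row shorter than the first row (IndexError), or a non-'X' non-digit char in the scanned
-- rectangle (int() → ValueError).
def Pre_solution (maps : List String) : Prop :=
  maps ≠ [] ∧ ∀ s ∈ maps,
    (maps.headD "").toList.length ≤ s.toList.length ∧
    ∀ j < (maps.headD "").toList.length,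
      s.toList.getD j 'X' = 'X' ∨ PySem.Chars.isdigit (s.toList.getD j 'X') = true
instance (maps : List String) : Decidable (Pre_solution maps) := by unfold Pre_solution; infer_instance

def pvWitness_solution : List String := ["X9", "3X"]

def Spec_solution (maps : List String) (out : List Int) : Prop := out = solution_alt maps
instance (maps : List String) (out : List Int) : Decidable (Spec_solution maps out) := by unfold Spec_solution; infer_instance

-- ===== CLAIM (what is proved, stated in full; the proofs are below) =====
def Claim_equal_solution : Prop := ∀ (maps : List String), Dom_solution maps → Pre_solution maps → Spec_solution maps (solution maps)


-- ===== LEMMAS AND PROOFS =====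

-- ---- spec layer: grid graph, connectivity, canonical answer list ----

def pvVal (g : List (List Char)) (q : Nat × Nat) : Int := pvIntChar (pvCell g q.1 q.2)

def Adj (g : List (List Char)) (row col : Nat) (p q : Nat × Nat) : Prop :=
  p.1 < row ∧ p.2 < col ∧ q.1 < row ∧ q.2 < col ∧
  pvCell g p.1 p.2 ≠ 'X' ∧ pvCell g q.1 q.2 ≠ 'X' ∧
  ((p.1 = q.1 ∧ (p.2 + 1 = q.2 ∨ q.2 + 1 = p.2)) ∨
   (p.2 = q.2 ∧ (p.1 + 1 = q.1 ∨ q.1 + 1 = p.1)))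

def Conn (g : List (List Char)) (row col : Nat) : Nat × Nat → Nat × Nat → Prop :=
  Relation.ReflTransGen (Adj g row col)

def scanL (row col : Nat) : List (Nat × Nat) :=
  (List.range row).flatMap fun i => (List.range col).map fun j => (i, j)

def pvPos (col : Nat) (p : Nat × Nat) : Nat := p.1 * col + p.2

def IsRep (g : List (List Char)) (row col : Nat) (p : Nat × Nat) : Prop :=
  p.1 < row ∧ p.2 < col ∧ pvCell g p.1 p.2 ≠ 'X' ∧
  ∀ q, Conn g row col p q → pvPos col p ≤ pvPos col q

noncomputable def cB (P : Prop) : Bool := @decide P (Classical.propDecidable P)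

theorem cB_iff (P : Prop) : cB P = true ↔ P := by
  unfold cB; exact @decide_eq_true_iff P (Classical.propDecidable P)

noncomputable def psum (g : List (List Char)) (row col : Nat) (r : Nat × Nat)
    (P : List (Nat × Nat)) : Int :=
  ((P.filter fun q => cB (Conn g row col r q)).map (pvVal g)).sum

noncomputable def compSum (g : List (List Char)) (row col : Nat) (r : Nat × Nat) : Int :=
  psum g row col r (scanL row col)

noncomputable def repsL (g : List (List Char)) (row col : Nat) : List (Nat × Nat) :=
  (scanL row col).filter fun p => cB (IsRep g row col p)

noncomputable def canon (g : List (List Char)) (row col : Nat) : List Int :=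
  (repsL g row col).map (compSum g row col)

-- ---- graph lemmas ----

theorem adj_symm {g : List (List Char)} {row col : Nat} :
    ∀ {p q}, Adj g row col p q → Adj g row col q p := by
  intro p q h
  obtain ⟨h1, h2, h3, h4, h5, h6, h7⟩ := h
  exact ⟨h3, h4, h1, h2, h6, h5, by tauto⟩

theorem conn_symm {g : List (List Char)} {row col : Nat} {p q : Nat × Nat}
    (h : Conn g row col p q) : Conn g row col q p :=
  Relation.ReflTransGen.symmetric (fun _ _ hy => adj_symm hy) h

theorem conn_trans {g : List (List Char)} {row col : Nat} {p q r : Nat × Nat}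
    (h1 : Conn g row col p q) (h2 : Conn g row col q r) : Conn g row col p r :=
  Relation.ReflTransGen.trans h1 h2

theorem conn_dest {g : List (List Char)} {row col : Nat} {p q : Nat × Nat}
    (h : Conn g row col p q) :
    p = q ∨ (q.1 < row ∧ q.2 < col ∧ pvCell g q.1 q.2 ≠ 'X') := by
  induction h with
  | refl => exact Or.inl rfl
  | tail _ hadj _ => exact Or.inr ⟨hadj.2.2.1, hadj.2.2.2.1, hadj.2.2.2.2.2.1⟩

theorem conn_land {g : List (List Char)} {row col : Nat} {p q : Nat × Nat}
    (h : Conn g row col p q) (hp : p.1 < row ∧ p.2 < col ∧ pvCell g p.1 p.2 ≠ 'X') :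
    q.1 < row ∧ q.2 < col ∧ pvCell g q.1 q.2 ≠ 'X' := by
  rcases conn_dest h with h' | h'
  · exact h' ▸ hp
  · exact h'

-- ---- scan list lemmas ----

theorem mem_scanL {row col : Nat} {p : Nat × Nat} :
    p ∈ scanL row col ↔ p.1 < row ∧ p.2 < col := by
  cases p with
  | mk i j => simp [scanL, List.mem_flatMap]

theorem pos_inj {col : Nat} {p q : Nat × Nat} (hp : p.2 < col) (hq : q.2 < col)
    (h : pvPos col p = pvPos col q) : p = q := by
  unfold pvPos at h
  have h1 : p.1 = q.1 := by
    rcases Nat.lt_trichotomy p.1 q.1 with hlt | he | hgt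
    · exfalso; nlinarith
    · exact he
    · exfalso; nlinarith
  have h2 : p.2 = q.2 := by rw [h1] at h; omega
  exact Prod.ext h1 h2

theorem scanL_pairwise {row col : Nat} :
    (scanL row col).Pairwise (fun a b => pvPos col a < pvPos col b) := by
  unfold scanL
  rw [List.pairwise_flatMap]
  constructor
  · intro a _
    rw [List.pairwise_map]
    exact (List.pairwise_lt_range).imp (by intro x y h; unfold pvPos; simpa using h)
  · refine (List.pairwise_lt_range).imp ?_
    intro i1 i2 h x hx y hy
    simp only [List.mem_map, List.mem_range] at hx hy
    obtain ⟨j1, hj1, rfl⟩ := hx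
    obtain ⟨j2, hj2, rfl⟩ := hy
    unfold pvPos; simp; nlinarith

theorem scanL_nodup {row col : Nat} : (scanL row col).Nodup :=
  (scanL_pairwise).imp (by intro a b h hab; rw [hab] at h; omega)

-- facts about a split scanL = P ++ cur :: rest
theorem prefix_pos_lt {row col : Nat} {P rest : List (Nat × Nat)} {cur : Nat × Nat}
    (hsplit : scanL row col = P ++ cur :: rest) :
    ∀ y ∈ P, pvPos col y < pvPos col cur := by
  intro y hy
  have := scanL_pairwise (row := row) (col := col)
  rw [hsplit, List.pairwise_append] at this
  exact this.2.2 y hy cur (by simp)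

theorem mem_prefix_of_pos_lt {row col : Nat} {P rest : List (Nat × Nat)} {cur : Nat × Nat}
    (hsplit : scanL row col = P ++ cur :: rest) {q : Nat × Nat}
    (hq : q.1 < row ∧ q.2 < col) (hlt : pvPos col q < pvPos col cur) : q ∈ P := by
  have hmem : q ∈ scanL row col := mem_scanL.mpr hq
  rw [hsplit] at hmem
  rcases List.mem_append.mp hmem with h | h
  · exact h
  · rcases List.mem_cons.mp h with rfl | h
    · omega
    · exfalso
      have := scanL_pairwise (row := row) (col := col)
      rw [hsplit, List.pairwise_append] at this
      have := (List.pairwise_cons.mp this.2.1).1 q h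
      omega

-- ---- visited matrix lemmas ----

def Shape (row col : Nat) (v : List (List Bool)) : Prop :=
  v.length = row ∧ ∀ r ∈ v, r.length = col

theorem shape_replicate {row col : Nat} :
    Shape row col (List.replicate row (List.replicate col false)) := by
  constructor
  · simp
  · intro r hr
    rw [List.eq_of_mem_replicate hr]; simp

theorem shape_vset {row col : Nat} {v : List (List Bool)} (hv : Shape row col v)
    {i j : Nat} : Shape row col (pvVSet v i j) := by
  unfold pvVSet
  by_cases hi : i < v.length
  · constructor
    · simp [hv.1]
    · intro r hr
      rcases List.mem_or_eq_of_mem_set hr with h | rfl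
      · exact hv.2 _ h
      · have hm : (v.getD i []) ∈ v := by
          rw [List.getD_eq_getElem _ _ hi]; exact List.getElem_mem hi
        simpa using hv.2 _ hm
  · rw [List.set_eq_of_length_le (show v.length ≤ i by omega)]; exact hv

theorem getD_row_mem {v : List (List Bool)} {i : Nat} (hi : i < v.length) :
    v.getD i [] ∈ v := by
  rw [List.getD_eq_getElem _ _ hi]; exact List.getElem_mem hi

theorem vget_vset {row col : Nat} {v : List (List Bool)} (hv : Shape row col v)
    {i j : Nat} (hi : i < row) (hj : j < col) (a b : Nat) :
    pvVGet (pvVSet v i j) a b = if a = i ∧ b = j then true else pvVGet v a b := by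
  have hrow := hv.1
  have hiv : i < v.length := by omega
  have hlen : (v.getD i []).length = col := hv.2 _ (getD_row_mem hiv)
  unfold pvVGet pvVSet
  simp only [List.getD_eq_getElem?_getD, List.getElem?_set]
  by_cases ha : a = i
  · subst ha
    by_cases hb : b = j
    · subst hb
      have hb2 : b < (v[a]'hiv).length := by
        rw [List.getD_eq_getElem _ _ hiv] at hlen; omega
      simp [hiv, hb2]
    · simp [hiv, hb, Ne.symm hb]
  · simp [ha, Ne.symm ha]

def unvis (v : List (List Bool)) : Nat := (v.map fun r => r.count false).sum

theorem unvis_le {row col : Nat} {v : List (List Bool)} (hv : Shape row col v) :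
    unvis v ≤ row * col := by
  unfold unvis
  calc (v.map fun r => r.count false).sum
      ≤ (v.map fun r => r.count false).length • col := by
        apply List.sum_le_card_nsmul
        intro x hx
        obtain ⟨r, hr, rfl⟩ := List.mem_map.mp hx
        calc r.count false ≤ r.length := List.count_le_length
          _ = col := hv.2 _ hr
    _ = row * col := by simp [hv.1]

theorem sum_set_nat {l : List Nat} {i : Nat} {a : Nat} (h : i < l.length) :
    (l.set i a).sum + l[i] = l.sum + a := by
  induction l generalizing i with
  | nil => simp at h
  | cons x t ih =>
    cases i with
    | zero => simp; omega
    | succ n =>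
      have hn : n < t.length := by simpa using h
      simp only [List.set_cons_succ, List.sum_cons, List.getElem_cons_succ]
      have := ih hn
      omega

theorem count_set_false {l : List Bool} {j : Nat} (hjr : j < l.length)
    (hgf : l[j] = false) : (l.set j true).count false + 1 = l.count false := by
  rw [List.count_set hjr]
  have hpos : 1 ≤ l.count false := by
    have : false ∈ l := by rw [← hgf]; exact List.getElem_mem hjr
    simpa [List.count_pos_iff] using this
  simp [hgf]
  omega

theorem unvis_vset {row col : Nat} {v : List (List Bool)} (hv : Shape row col v)
    {i j : Nat} (hi : i < row) (hj : j < col) (h : pvVGet v i j = false) :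
    unvis (pvVSet v i j) + 1 = unvis v := by
  have hrow := hv.1
  have hiv : i < v.length := by omega
  have hlen : (v.getD i []).length = col := hv.2 _ (getD_row_mem hiv)
  have hjr : j < (v.getD i []).length := by omega
  have hgf : (v.getD i [])[j] = false := by
    unfold pvVGet at h
    rw [List.getD_eq_getElem?_getD, List.getElem?_eq_getElem hjr] at h
    simpa using h
  unfold unvis pvVSet
  rw [List.map_set]
  have hset := sum_set_nat (l := v.map fun r => r.count false) (i := i) (a := ((v.getD i []).set j true).count false) (by simpa using hiv)
  have hgetm : (v.map fun r => r.count false)[i]'(by simpa using hiv) = (v.getD i []).count false := by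
    rw [List.getElem_map, List.getD_eq_getElem _ _ hiv]
  rw [hgetm] at hset
  have hcnt : ((v.getD i []).set j true).count false + 1 = (v.getD i []).count false :=
    count_set_false hjr hgf
  omega

-- ---- BFS (port A) correctness ----

def DirHit (c : Nat × Nat) (dir : Nat) (y : Nat × Nat) : Prop :=
  (y.1 : Int) = (c.1 : Int) + ([-1, 1, 0, 0] : List Int).getD dir 0 ∧
  (y.2 : Int) = (c.2 : Int) + ([0, 0, -1, 1] : List Int).getD dir 0

theorem adj_dirhit {g : List (List Char)} {row col : Nat} {c y : Nat × Nat}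
    (h : Adj g row col c y) : ∃ d, d < 4 ∧ DirHit c d y := by
  obtain ⟨_, _, _, _, _, _, hgeo⟩ := h
  rcases hgeo with ⟨h1, h2 | h2⟩ | ⟨h1, h2 | h2⟩
  · exact ⟨3, by omega, by constructor <;> simp <;> omega⟩
  · exact ⟨2, by omega, by constructor <;> simp <;> omega⟩
  · exact ⟨1, by omega, by constructor <;> simp <;> omega⟩
  · exact ⟨0, by omega, by constructor <;> simp <;> omega⟩

-- the body of one direction of the neighbour loop, with the offsets as parameters
def pvStep' (g : List (List Char)) (row col : Nat) (c : Nat × Nat)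
    (st : List (List Bool) × List (Nat × Nat) × Int) (dx dy : Int) :
    List (List Bool) × List (Nat × Nat) × Int :=
  let nx : Int := (c.1 : Int) + dx
  let ny : Int := (c.2 : Int) + dy
  if 0 ≤ nx ∧ nx < (row : Int) ∧ 0 ≤ ny ∧ ny < (col : Int) then
    if pvCell g nx.toNat ny.toNat ≠ 'X' ∧ pvVGet st.1 nx.toNat ny.toNat = false then
      (pvVSet st.1 nx.toNat ny.toNat, st.2.1 ++ [(nx.toNat, ny.toNat)],
       st.2.2 + pvIntChar (pvCell g nx.toNat ny.toNat))
    else st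
  else st

theorem pvStep'_spec {g : List (List Char)} {row col : Nat} {c : Nat × Nat}
    (hc : c.1 < row ∧ c.2 < col ∧ pvCell g c.1 c.2 ≠ 'X')
    (st : List (List Bool) × List (Nat × Nat) × Int) (hsh : Shape row col st.1)
    {dx dy : Int}
    (hgeo : (dx = -1 ∧ dy = 0) ∨ (dx = 1 ∧ dy = 0) ∨ (dx = 0 ∧ dy = -1) ∨ (dx = 0 ∧ dy = 1)) :
    ∃ A : List (Nat × Nat),
      A.Nodup ∧
      (∀ a b, pvVGet (pvStep' g row col c st dx dy).1 a b = true ↔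
        pvVGet st.1 a b = true ∨ (a, b) ∈ A) ∧
      (pvStep' g row col c st dx dy).2.1 = st.2.1 ++ A ∧
      (pvStep' g row col c st dx dy).2.2 = st.2.2 + (A.map (pvVal g)).sum ∧
      Shape row col (pvStep' g row col c st dx dy).1 ∧
      unvis (pvStep' g row col c st dx dy).1 + A.length = unvis st.1 ∧
      (∀ x ∈ A, pvVGet st.1 x.1 x.2 = false ∧ Adj g row col c x) ∧
      (∀ y, Adj g row col c y →
        ((y.1 : Int) = (c.1 : Int) + dx ∧ (y.2 : Int) = (c.2 : Int) + dy) →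
        pvVGet (pvStep' g row col c st dx dy).1 y.1 y.2 = true) := by
  unfold pvStep'
  by_cases hb : 0 ≤ (c.1 : Int) + dx ∧ (c.1 : Int) + dx < (row : Int) ∧
      0 ≤ (c.2 : Int) + dy ∧ (c.2 : Int) + dy < (col : Int)
  · simp only [if_pos hb]
    by_cases hl : pvCell g ((c.1 : Int) + dx).toNat ((c.2 : Int) + dy).toNat ≠ 'X' ∧
        pvVGet st.1 ((c.1 : Int) + dx).toNat ((c.2 : Int) + dy).toNat = false
    · simp only [if_pos hl]
      refine ⟨[(((c.1 : Int) + dx).toNat, ((c.2 : Int) + dy).toNat)],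
        by simp, ?_, by simp, by simp [pvVal], shape_vset hsh, ?_, ?_, ?_⟩
      · intro a b
        rw [vget_vset hsh (by omega) (by omega)]
        constructor
        · intro h; split_ifs at h with hif
          · exact Or.inr (by simp [Prod.ext_iff]; omega)
          · exact Or.inl h
        · intro h; rcases h with h | h
          · split_ifs with hif
            · rfl
            · exact h
          · simp only [List.mem_singleton, Prod.ext_iff] at h
            rw [if_pos (by omega)]
      · simpa using unvis_vset hsh (by omega) (by omega) hl.2
      · intro x hx
        simp only [List.mem_singleton] at hx
        subst hx
        refine ⟨hl.2, ?_⟩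
        refine ⟨hc.1, hc.2.1, by omega, by omega, hc.2.2, hl.1, ?_⟩
        simp only []
        rcases hgeo with ⟨rfl, rfl⟩ | ⟨rfl, rfl⟩ | ⟨rfl, rfl⟩ | ⟨rfl, rfl⟩ <;> omega
      · intro y _ hy
        have h1 : y.1 = ((c.1 : Int) + dx).toNat := by omega
        have h2 : y.2 = ((c.2 : Int) + dy).toNat := by omega
        rw [h1, h2, vget_vset hsh (by omega) (by omega), if_pos ⟨rfl, rfl⟩]
    · simp only [if_neg hl]
      refine ⟨[], by simp, by simp, by simp, by simp, hsh, by simp, by simp, ?_⟩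
      intro y hadj hy
      have h1 : y.1 = ((c.1 : Int) + dx).toNat := by omega
      have h2 : y.2 = ((c.2 : Int) + dy).toNat := by omega
      rcases Bool.eq_false_or_eq_true (pvVGet st.1 y.1 y.2) with ht | hf
      · exact ht
      · exfalso
        exact hl ⟨by rw [← h1, ← h2]; exact hadj.2.2.2.2.2.1, by rw [← h1, ← h2]; exact hf⟩
  · simp only [if_neg hb]
    refine ⟨[], by simp, by simp, by simp, by simp, hsh, by simp, by simp, ?_⟩
    intro y hadj hy
    exfalso
    obtain ⟨_, _, hy1, hy2, _, _, _⟩ := hadj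
    exact hb ⟨by omega, by omega, by omega, by omega⟩

-- effect of one direction of the neighbour loop
theorem pvStep_spec {g : List (List Char)} {row col : Nat} {c : Nat × Nat}
    (hc : c.1 < row ∧ c.2 < col ∧ pvCell g c.1 c.2 ≠ 'X')
    (st : List (List Bool) × List (Nat × Nat) × Int) (hsh : Shape row col st.1)
    {dir : Nat} (hdir : dir < 4) :
    ∃ A : List (Nat × Nat),
      A.Nodup ∧
      (∀ a b, pvVGet (pvStep g row col c st dir).1 a b = true ↔
        pvVGet st.1 a b = true ∨ (a, b) ∈ A) ∧
      (pvStep g row col c st dir).2.1 = st.2.1 ++ A ∧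
      (pvStep g row col c st dir).2.2 = st.2.2 + (A.map (pvVal g)).sum ∧
      Shape row col (pvStep g row col c st dir).1 ∧
      unvis (pvStep g row col c st dir).1 + A.length = unvis st.1 ∧
      (∀ x ∈ A, pvVGet st.1 x.1 x.2 = false ∧ Adj g row col c x) ∧
      (∀ y, Adj g row col c y → DirHit c dir y →
        pvVGet (pvStep g row col c st dir).1 y.1 y.2 = true) := by
  have hd : dir = 0 ∨ dir = 1 ∨ dir = 2 ∨ dir = 3 := by omega
  rcases hd with rfl | rfl | rfl | rfl
  · exact pvStep'_spec hc st hsh (Or.inl ⟨rfl, rfl⟩)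
  · exact pvStep'_spec hc st hsh (Or.inr (Or.inl ⟨rfl, rfl⟩))
  · exact pvStep'_spec hc st hsh (Or.inr (Or.inr (Or.inl ⟨rfl, rfl⟩)))
  · exact pvStep'_spec hc st hsh (Or.inr (Or.inr (Or.inr ⟨rfl, rfl⟩)))

-- effect of folding the neighbour step over a list of directions
theorem pvFold_spec {g : List (List Char)} {row col : Nat} {c : Nat × Nat}
    (hc : c.1 < row ∧ c.2 < col ∧ pvCell g c.1 c.2 ≠ 'X') :
    ∀ (ds : List Nat), (∀ d ∈ ds, d < 4) →
    ∀ (st : List (List Bool) × List (Nat × Nat) × Int), Shape row col st.1 →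
    ∃ A : List (Nat × Nat),
      A.Nodup ∧
      (∀ a b, pvVGet (ds.foldl (pvStep g row col c) st).1 a b = true ↔
        pvVGet st.1 a b = true ∨ (a, b) ∈ A) ∧
      (ds.foldl (pvStep g row col c) st).2.1 = st.2.1 ++ A ∧
      (ds.foldl (pvStep g row col c) st).2.2 = st.2.2 + (A.map (pvVal g)).sum ∧
      Shape row col (ds.foldl (pvStep g row col c) st).1 ∧
      unvis (ds.foldl (pvStep g row col c) st).1 + A.length = unvis st.1 ∧
      (∀ x ∈ A, pvVGet st.1 x.1 x.2 = false ∧ Adj g row col c x) ∧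
      (∀ y, Adj g row col c y → (∃ d ∈ ds, DirHit c d y) →
        pvVGet (ds.foldl (pvStep g row col c) st).1 y.1 y.2 = true) := by
  intro ds
  induction ds with
  | nil =>
    intro _ st hsh
    exact ⟨[], by simp, by simp, by simp, by simp, hsh, by simp, by simp, by simp⟩
  | cons d ds ih =>
    intro hds st hsh
    obtain ⟨A0, hA0nd, hA0vis, hA0q, hA0s, hA0sh, hA0un, hA0mem, hA0cmp⟩ :=
      pvStep_spec hc st hsh (hds d (by simp))
    obtain ⟨A1, hA1nd, hA1vis, hA1q, hA1s, hA1sh, hA1un, hA1mem, hA1cmp⟩ :=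
      ih (fun d' hd' => hds d' (by simp [hd'])) (pvStep g row col c st d) hA0sh
    simp only [List.foldl_cons]
    refine ⟨A0 ++ A1, ?_, ?_, ?_, ?_, hA1sh, ?_, ?_, ?_⟩
    · rw [List.nodup_append]
      refine ⟨hA0nd, hA1nd, ?_⟩
      intro x hx0 y hy1 hxy
      subst hxy
      have h1 := (hA1mem x hy1).1
      have h0 : pvVGet (pvStep g row col c st d).1 x.1 x.2 = true :=
        (hA0vis x.1 x.2).mpr (Or.inr hx0)
      rw [h0] at h1; exact Bool.true_eq_false.mp h1
    · intro a b
      rw [hA1vis, hA0vis]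
      simp [List.mem_append, or_assoc]
    · rw [hA1q, hA0q, List.append_assoc]
    · rw [hA1s, hA0s]
      simp [add_assoc]
    · have := hA1un; have := hA0un
      simp only [List.length_append]; omega
    · intro x hx
      rcases List.mem_append.mp hx with h | h
      · exact hA0mem x h
      · have h1 := hA1mem x h
        refine ⟨?_, h1.2⟩
        rcases Bool.eq_false_or_eq_true (pvVGet st.1 x.1 x.2) with ht | hf
        · exfalso
          have hvis : pvVGet (pvStep g row col c st d).1 x.1 x.2 = true :=
            (hA0vis x.1 x.2).mpr (Or.inl ht)
          rw [hvis] at h1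
          exact Bool.true_eq_false.mp h1.1
        · exact hf
    · intro y hadj hd'
      obtain ⟨d', hd'mem, hhit⟩ := hd'
      rcases List.mem_cons.mp hd'mem with rfl | hmem
      · exact (hA1vis y.1 y.2).mpr (Or.inl (hA0cmp y hadj hhit))
      · exact hA1cmp y hadj ⟨d', hmem, hhit⟩

-- closing the loop: an empty queue means M is the whole component
theorem bfs_close {g : List (List Char)} {row col : Nat} {p : Nat × Nat}
    {v₀ v : List (List Bool)} {M : List (Nat × Nat)} {s : Int}
    (hp : p.1 < row ∧ p.2 < col ∧ pvCell g p.1 p.2 ≠ 'X')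
    (hfresh : ∀ x, Conn g row col p x → pvVGet v₀ x.1 x.2 = false)
    (hnd : M.Nodup)
    (hM : ∀ x ∈ M, Conn g row col p x)
    (hpM : p ∈ M)
    (hvis : ∀ a b, pvVGet v a b = true ↔ pvVGet v₀ a b = true ∨ (a, b) ∈ M)
    (hcl : ∀ x ∈ M, ∀ y, Adj g row col x y → pvVGet v y.1 y.2 = true)
    (hs : s = (M.map (pvVal g)).sum) :
    (∀ a b, pvVGet v a b = true ↔ pvVGet v₀ a b = true ∨ Conn g row col p (a, b)) ∧
    s = compSum g row col p := by
  have hcomp : ∀ x, Conn g row col p x → x ∈ M := by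
    intro x hx
    induction hx with
    | refl => exact hpM
    | @tail b c hconn hadj ih =>
      have hvy := hcl b ih c hadj
      rcases (hvis c.1 c.2).mp hvy with h | h
      · exfalso
        have := hfresh c (hconn.tail hadj)
        rw [this] at h
        exact Bool.false_ne_true h
      · exact h
  constructor
  · intro a b
    rw [hvis]
    constructor
    · rintro (h | h)
      · exact Or.inl h
      · exact Or.inr (hM _ h)
    · rintro (h | h)
      · exact Or.inl h
      · exact Or.inr (hcomp _ h)
  · have hperm : M.Perm ((scanL row col).filter fun q => cB (Conn g row col p q)) := by
      apply List.perm_of_nodup_nodup_toFinset_eq hnd (scanL_nodup.filter _)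
      ext x
      simp only [List.mem_toFinset, List.mem_filter, mem_scanL, cB_iff]
      constructor
      · intro hx
        have hcx := hM x hx
        have hv := conn_land hcx hp
        exact ⟨⟨hv.1, hv.2.1⟩, hcx⟩
      · intro hx
        exact hcomp x hx.2
    rw [hs]
    unfold compSum psum
    exact (hperm.map (pvVal g)).sum_eq

-- the while-queue loop visits exactly the component of p and sums its supplies
theorem bfsLoop_spec {g : List (List Char)} {row col : Nat} {p : Nat × Nat}
    {v₀ : List (List Bool)}
    (hp : p.1 < row ∧ p.2 < col ∧ pvCell g p.1 p.2 ≠ 'X')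
    (hfresh : ∀ x, Conn g row col p x → pvVGet v₀ x.1 x.2 = false) :
    ∀ (fuel : Nat) (v : List (List Bool)) (q : List (Nat × Nat)) (s : Int)
      (M : List (Nat × Nat)),
      Shape row col v →
      M.Nodup →
      (∀ x ∈ M, Conn g row col p x) →
      p ∈ M →
      (∀ a b, pvVGet v a b = true ↔ pvVGet v₀ a b = true ∨ (a, b) ∈ M) →
      (∀ c ∈ q, c ∈ M) →
      (∀ x ∈ M, x ∉ q → ∀ y, Adj g row col x y → pvVGet v y.1 y.2 = true) →
      s = (M.map (pvVal g)).sum →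
      unvis v + q.length ≤ fuel →
      (∀ a b, pvVGet (pvBfsLoop g row col fuel v q s).1 a b = true ↔
        pvVGet v₀ a b = true ∨ Conn g row col p (a, b)) ∧
      Shape row col (pvBfsLoop g row col fuel v q s).1 ∧
      (pvBfsLoop g row col fuel v q s).2 = compSum g row col p := by
  intro fuel
  induction fuel with
  | zero =>
    intro v q s M hsh hnd hM hpM hvis hq hcl hs hfuel
    have hq0 : q = [] := List.eq_nil_of_length_eq_zero (by omega)
    subst hq0
    have hres : pvBfsLoop g row col 0 v [] s = (v, s) := rfl
    rw [hres]
    have := bfs_close hp hfresh hnd hM hpM hvis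
      (fun x hx y hy => hcl x hx (by simp) y hy) hs
    exact ⟨this.1, hsh, this.2⟩
  | succ fuel ih =>
    intro v q s M hsh hnd hM hpM hvis hq hcl hs hfuel
    match q with
    | [] =>
      have hres : pvBfsLoop g row col (fuel + 1) v [] s = (v, s) := rfl
      rw [hres]
      have := bfs_close hp hfresh hnd hM hpM hvis
        (fun x hx y hy => hcl x hx (by simp) y hy) hs
      exact ⟨this.1, hsh, this.2⟩
    | c :: qt =>
      have hcM : c ∈ M := hq c (by simp)
      have hcc : Conn g row col p c := hM c hcM
      have hc : c.1 < row ∧ c.2 < col ∧ pvCell g c.1 c.2 ≠ 'X' := conn_land hcc hp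
      obtain ⟨A, hAnd, hAvis, hAq, hAs, hAsh, hAun, hAmem, hAcmp⟩ :=
        pvFold_spec hc (List.range 4) (fun d hd => List.mem_range.mp hd) (v, qt, s) hsh
      have hres : pvBfsLoop g row col (fuel + 1) v (c :: qt) s =
          pvBfsLoop g row col fuel
            ((List.range 4).foldl (pvStep g row col c) (v, qt, s)).1
            ((List.range 4).foldl (pvStep g row col c) (v, qt, s)).2.1
            ((List.range 4).foldl (pvStep g row col c) (v, qt, s)).2.2 := rfl
      rw [hres]
      have hMsub : ∀ x ∈ M, pvVGet v x.1 x.2 = true :=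
        fun x hx => (hvis x.1 x.2).mpr (Or.inr hx)
      apply ih _ _ _ (M ++ A) hAsh
      -- nodup
      · rw [List.nodup_append]
        refine ⟨hnd, hAnd, ?_⟩
        intro x hx y hy hxy
        subst hxy
        have h1 := (hAmem x hy).1
        rw [hMsub x hx] at h1
        exact Bool.true_eq_false.mp h1
      -- ⊆ comp
      · intro x hx
        rcases List.mem_append.mp hx with h | h
        · exact hM x h
        · exact (hM c hcM).tail (hAmem x h).2
      · exact List.mem_append.mpr (Or.inl hpM)
      -- vis iff
      · intro a b
        rw [hAvis]
        rw [hvis]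
        simp [List.mem_append, or_assoc]
      -- queue ⊆ M'
      · intro x hx
        rw [hAq] at hx
        rcases List.mem_append.mp hx with h | h
        · exact List.mem_append.mpr (Or.inl (hq x (by simp [h])))
        · exact List.mem_append.mpr (Or.inr h)
      -- closedness
      · intro x hx hxq y hy
        rw [hAq] at hxq
        rcases List.mem_append.mp hx with h | h
        · by_cases hxc : x = c
          · subst hxc
            obtain ⟨d, hd4, hdh⟩ := adj_dirhit hy
            exact hAcmp y hy ⟨d, List.mem_range.mpr hd4, hdh⟩
          · have hold : pvVGet v y.1 y.2 = true := by
              apply hcl x h _ y hy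
              intro hmem
              rcases List.mem_cons.mp hmem with h' | h'
              · exact hxc h'
              · exact hxq (List.mem_append.mpr (Or.inl h'))
            exact (hAvis y.1 y.2).mpr (Or.inl hold)
        · exact absurd (List.mem_append.mpr (Or.inr h)) hxq
      -- sum
      · rw [hAs, hs]
        simp
      -- fuel
      · have h1 : unvis ((List.range 4).foldl (pvStep g row col c) (v, qt, s)).1 + A.length = unvis v := hAun
        have h2 : ((List.range 4).foldl (pvStep g row col c) (v, qt, s)).2.1.length =
            qt.length + A.length := by rw [hAq]; simp
        rw [h2]
        simp only [List.length_cons] at hfuel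
        omega

-- ---- the outer scan loop of port A ----

def pvOuterF (g : List (List Char)) (row col : Nat)
    (st : List (List Bool) × List Int) (q : Nat × Nat) : List (List Bool) × List Int :=
  if pvCell g q.1 q.2 ≠ 'X' ∧ pvVGet st.1 q.1 q.2 = false then
    ((pvBfs g row col st.1 q.1 q.2).1, st.2 ++ [(pvBfs g row col st.1 q.1 q.2).2])
  else st

theorem scan_fold_eq (g : List (List Char)) (row col : Nat)
    (init : List (List Bool) × List Int) :
    (List.range row).foldl (fun st i =>
      (List.range col).foldl (fun (st : List (List Bool) × List Int) j =>
        if pvCell g i j ≠ 'X' ∧ pvVGet st.1 i j = false then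
          let r := pvBfs g row col st.1 i j
          (r.1, st.2 ++ [r.2])
        else st) st) init
    = (scanL row col).foldl (pvOuterF g row col) init := by
  unfold scanL
  rw [List.foldl_flatMap]
  apply PySem.List.foldl_congr_mem
  intro st i _
  rw [List.foldl_map]
  rfl

theorem vget_replicate {row col : Nat} {a b : Nat} (ha : a < row) (hb : b < col) :
    pvVGet (List.replicate row (List.replicate col false)) a b = false := by
  unfold pvVGet
  simp [List.getD_eq_getElem?_getD, ha, hb]

theorem outer_spec {g : List (List Char)} {row col : Nat} :
    ∀ (suffix P : List (Nat × Nat)) (st : List (List Bool) × List Int),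
      scanL row col = P ++ suffix →
      Shape row col st.1 →
      (∀ a b, a < row → b < col →
        (pvVGet st.1 a b = true ↔
          ∃ y ∈ P, pvCell g y.1 y.2 ≠ 'X' ∧ Conn g row col y (a, b))) →
      st.2 = (P.filter fun y => cB (IsRep g row col y)).map (compSum g row col) →
      (suffix.foldl (pvOuterF g row col) st).2 =
        ((P ++ suffix).filter fun y => cB (IsRep g row col y)).map (compSum g row col) := by
  intro suffix
  induction suffix with
  | nil =>
    intro P st hsplit hsh hvis hans
    simpa using hans
  | cons cur rest ih =>
    intro P st hsplit hsh hvis hans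
    have hcur : cur.1 < row ∧ cur.2 < col := by
      have : cur ∈ scanL row col := by rw [hsplit]; simp
      exact mem_scanL.mp this
    rw [List.foldl_cons]
    have hsplit' : scanL row col = (P ++ [cur]) ++ rest := by
      rw [hsplit]; simp
    have hstep : ∀ st', st' = pvOuterF g row col st cur →
        Shape row col st'.1 →
        (∀ a b, a < row → b < col →
          (pvVGet st'.1 a b = true ↔
            ∃ y ∈ P ++ [cur], pvCell g y.1 y.2 ≠ 'X' ∧ Conn g row col y (a, b))) →
        st'.2 = ((P ++ [cur]).filter fun y => cB (IsRep g row col y)).map (compSum g row col) →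
        (rest.foldl (pvOuterF g row col) st').2 =
          ((P ++ cur :: rest).filter fun y => cB (IsRep g row col y)).map (compSum g row col) := by
      intro st' hdef hsh' hvis' hans'
      have := ih (P ++ [cur]) st' hsplit' hsh' hvis' hans'
      simpa using this
    by_cases hb : pvCell g cur.1 cur.2 ≠ 'X' ∧ pvVGet st.1 cur.1 cur.2 = false
    · have hof : pvOuterF g row col st cur =
          ((pvBfs g row col st.1 cur.1 cur.2).1, st.2 ++ [(pvBfs g row col st.1 cur.1 cur.2).2]) := by
        unfold pvOuterF; rw [if_pos hb]
      -- the untouched component of cur: BFS explores it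
      have hfresh : ∀ x, Conn g row col cur x → pvVGet st.1 x.1 x.2 = false := by
        intro x hx
        rcases Bool.eq_false_or_eq_true (pvVGet st.1 x.1 x.2) with ht | hf
        · exfalso
          rcases conn_dest hx with rfl | hxv
          · rw [hb.2] at ht; exact Bool.false_ne_true ht
          · obtain ⟨y, hyP, hyl, hyc⟩ := (hvis x.1 x.2 hxv.1 hxv.2.1).mp ht
            have hcv : pvVGet st.1 cur.1 cur.2 = true :=
              (hvis cur.1 cur.2 hcur.1 hcur.2).mpr
                ⟨y, hyP, hyl, conn_trans hyc (conn_symm hx)⟩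
            rw [hb.2] at hcv; exact Bool.false_ne_true hcv
        · exact hf
      have hpl : cur.1 < row ∧ cur.2 < col ∧ pvCell g cur.1 cur.2 ≠ 'X' :=
        ⟨hcur.1, hcur.2, hb.1⟩
      have hu1 : unvis (pvVSet st.1 cur.1 cur.2) + 1 = unvis st.1 :=
        unvis_vset hsh hcur.1 hcur.2 hb.2
      have hbfs := bfsLoop_spec hpl hfresh (row * col + 1)
        (pvVSet st.1 cur.1 cur.2) [cur] (pvIntChar (pvCell g cur.1 cur.2)) [cur]
        (shape_vset hsh) (by simp)
        (by intro x hx; simp only [List.mem_singleton] at hx; subst hx; exact Relation.ReflTransGen.refl)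
        (by simp)
        (by
          intro a b
          rw [vget_vset hsh hcur.1 hcur.2]
          constructor
          · intro h; split_ifs at h with hif
            · exact Or.inr (by simp [Prod.ext_iff]; tauto)
            · exact Or.inl h
          · intro h; rcases h with h | h
            · split_ifs with hif
              · rfl
              · exact h
            · simp only [List.mem_singleton, Prod.ext_iff] at h
              rw [if_pos (by omega)])
        (by simp)
        (by intro x hx hxq; exact absurd (by simpa using hx) (by simpa using hxq))
        (by simp [pvVal])
        (by have := unvis_le hsh; simp; omega)
      have hrep : IsRep g row col cur := by
        refine ⟨hcur.1, hcur.2, hb.1, ?_⟩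
        intro q hq
        by_contra hlt
        rcases conn_dest hq with rfl | hqv
        · omega
        · have hqP : q ∈ P := mem_prefix_of_pos_lt hsplit ⟨hqv.1, hqv.2.1⟩ (by omega)
          have hcv : pvVGet st.1 cur.1 cur.2 = true :=
            (hvis cur.1 cur.2 hcur.1 hcur.2).mpr ⟨q, hqP, hqv.2.2, conn_symm hq⟩
          rw [hb.2] at hcv; exact Bool.false_ne_true hcv
      have hbfseq : pvBfs g row col st.1 cur.1 cur.2 =
          pvBfsLoop g row col (row * col + 1) (pvVSet st.1 cur.1 cur.2) [cur]
            (pvIntChar (pvCell g cur.1 cur.2)) := rfl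
      apply hstep _ rfl
      · rw [hof]
        simpa [hbfseq] using hbfs.2.1
      · intro a b ha hbb
        rw [hof]
        simp only []
        rw [hbfseq, hbfs.1 a b, hvis a b ha hbb]
        constructor
        · rintro (⟨y, hy, hl, hc⟩ | h)
          · exact ⟨y, by simp [hy], hl, hc⟩
          · exact ⟨cur, by simp, hb.1, h⟩
        · rintro ⟨y, hy, hl, hc⟩
          rcases List.mem_append.mp hy with h | h
          · exact Or.inl ⟨y, h, hl, hc⟩
          · simp only [List.mem_singleton] at h
            subst h
            exact Or.inr hc
      · rw [hof]
        simp only []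
        rw [List.filter_append, List.map_append, ← hans]
        have hfc : List.filter (fun y => cB (IsRep g row col y)) [cur] = [cur] := by
          simp [List.filter, (cB_iff _).mpr hrep]
        rw [hfc]
        simp only [List.map_cons, List.map_nil]
        rw [hbfseq, hbfs.2.2]
    · have hof : pvOuterF g row col st cur = st := by
        unfold pvOuterF; rw [if_neg hb]
      have hnorep : ¬ IsRep g row col cur := by
        intro hrep
        rcases not_and_or.mp hb with h | h
        · exact h hrep.2.2.1
        · have hvt : pvVGet st.1 cur.1 cur.2 = true := by
            rcases Bool.eq_false_or_eq_true (pvVGet st.1 cur.1 cur.2) with ht | hf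
            · exact ht
            · exact absurd hf h
          obtain ⟨y, hyP, hyl, hyc⟩ := (hvis cur.1 cur.2 hcur.1 hcur.2).mp hvt
          have hlt := prefix_pos_lt hsplit y hyP
          have := hrep.2.2.2 y (conn_symm hyc)
          omega
      apply hstep _ rfl
      · rw [hof]; exact hsh
      · intro a b ha hbb
        rw [hof, hvis a b ha hbb]
        constructor
        · rintro ⟨y, hy, hl, hc⟩
          exact ⟨y, by simp [hy], hl, hc⟩
        · rintro ⟨y, hy, hl, hc⟩
          rcases List.mem_append.mp hy with h | h
          · exact ⟨y, h, hl, hc⟩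
          · simp only [List.mem_singleton] at h
            rw [h] at hc hl
            rcases not_and_or.mp hb with h' | h'
            · exact absurd hl h'
            · have hvt : pvVGet st.1 cur.1 cur.2 = true := by
                rcases Bool.eq_false_or_eq_true (pvVGet st.1 cur.1 cur.2) with ht | hf
                · exact ht
                · exact absurd hf h'
              obtain ⟨y0, hy0P, hy0l, hy0c⟩ := (hvis cur.1 cur.2 hcur.1 hcur.2).mp hvt
              exact ⟨y0, hy0P, hy0l, conn_trans hy0c hc⟩
      · rw [hof, List.filter_append, List.map_append, ← hans]
        have hfc : List.filter (fun y => cB (IsRep g row col y)) [cur] = [] := by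
          simp only [List.filter_cons, List.filter_nil]
          rw [if_neg (by simp [cB_iff, hnorep])]
        rw [hfc]
        simp

-- port A returns the canonical value
theorem solutionA_canon (maps : List String) :
    solution maps =
      (if canon (pvGrid maps) maps.length ((pvGrid maps).headD []).length ≠ [] then
        PySem.List.sorted (canon (pvGrid maps) maps.length ((pvGrid maps).headD []).length)
          (fun x => x) false
      else [-1]) := by
  have hrfl : solution maps =
      (if ((List.range maps.length).foldl (fun st i =>
            (List.range ((pvGrid maps).headD []).length).foldl
              (fun (st : List (List Bool) × List Int) j =>
                if pvCell (pvGrid maps) i j ≠ 'X' ∧ pvVGet st.1 i j = false then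
                  let r := pvBfs (pvGrid maps) maps.length ((pvGrid maps).headD []).length st.1 i j
                  (r.1, st.2 ++ [r.2])
                else st) st)
            (List.replicate maps.length
              (List.replicate ((pvGrid maps).headD []).length false), ([] : List Int))).2 ≠ [] then
        PySem.List.sorted ((List.range maps.length).foldl (fun st i =>
            (List.range ((pvGrid maps).headD []).length).foldl
              (fun (st : List (List Bool) × List Int) j =>
                if pvCell (pvGrid maps) i j ≠ 'X' ∧ pvVGet st.1 i j = false then
                  let r := pvBfs (pvGrid maps) maps.length ((pvGrid maps).headD []).length st.1 i j
                  (r.1, st.2 ++ [r.2])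
                else st) st)
            (List.replicate maps.length
              (List.replicate ((pvGrid maps).headD []).length false), ([] : List Int))).2
          (fun x => x) false
      else [-1]) := rfl
  have h := outer_spec (g := pvGrid maps) (row := maps.length)
    (col := ((pvGrid maps).headD []).length)
    (scanL maps.length ((pvGrid maps).headD []).length) []
    (List.replicate maps.length (List.replicate ((pvGrid maps).headD []).length false), [])
    (by simp) shape_replicate
    (by
      intro a b ha hb
      rw [vget_replicate ha hb]
      simp)
    (by simp)
  simp only [List.nil_append] at h
  rw [hrfl, scan_fold_eq, h]
  rfl

-- ---- union-find (port B) machinery ----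

theorem getD_set_nat {l : List Nat} {i a x : Nat} (hi : i < l.length) :
    (l.set i a).getD x x = if x = i then a else l.getD x x := by
  rw [List.getD_eq_getElem?_getD, List.getD_eq_getElem?_getD, List.getElem?_set]
  by_cases h : x = i
  · subst h; simp [hi]
  · simp [h, Ne.symm h]

def UFB (parent : List Nat) : Prop := ∀ x, parent.getD x x ≤ x

theorem find_fix {parent : List Nat} {x : Nat} (h : parent.getD x x = x) :
    pvFind parent x = x := by
  show (if parent.getD x x = x then x else pvFindLoop parent x (parent.getD x x)) = x
  rw [if_pos h]

theorem find_of_ge {parent : List Nat} {x : Nat} (h : parent.length ≤ x) :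
    pvFind parent x = x :=
  find_fix (List.getD_eq_default _ _ h)

theorem findLoop_fuel {parent : List Nat} (hB : UFB parent) :
    ∀ x f₁ f₂, x + 1 ≤ f₁ → x + 1 ≤ f₂ →
      pvFindLoop parent f₁ x = pvFindLoop parent f₂ x := by
  intro x
  induction x using Nat.strong_induction_on with
  | _ x ih =>
    intro f₁ f₂ h₁ h₂
    obtain ⟨g₁, rfl⟩ : ∃ g₁, f₁ = g₁ + 1 := ⟨f₁ - 1, by omega⟩
    obtain ⟨g₂, rfl⟩ : ∃ g₂, f₂ = g₂ + 1 := ⟨f₂ - 1, by omega⟩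
    show (if parent.getD x x = x then x else pvFindLoop parent g₁ (parent.getD x x)) =
      (if parent.getD x x = x then x else pvFindLoop parent g₂ (parent.getD x x))
    by_cases hfix : parent.getD x x = x
    · rw [if_pos hfix, if_pos hfix]
    · rw [if_neg hfix, if_neg hfix]
      have hlt : parent.getD x x < x := Nat.lt_of_le_of_ne (hB x) hfix
      exact ih _ hlt _ _ (by omega) (by omega)

theorem find_step {parent : List Nat} (hB : UFB parent) {x : Nat}
    (hfix : parent.getD x x ≠ x) :
    pvFind parent x = pvFind parent (parent.getD x x) := by
  have hlt : parent.getD x x < x := Nat.lt_of_le_of_ne (hB x) hfix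
  unfold pvFind
  have h1 : pvFindLoop parent (x + 1) x = pvFindLoop parent x (parent.getD x x) := by
    show (if parent.getD x x = x then x else pvFindLoop parent x (parent.getD x x)) = _
    rw [if_neg hfix]
  rw [h1]
  exact findLoop_fuel hB _ _ _ (by omega) (by omega)

theorem find_le {parent : List Nat} (hB : UFB parent) : ∀ x, pvFind parent x ≤ x := by
  intro x
  induction x using Nat.strong_induction_on with
  | _ x ih =>
    by_cases hfix : parent.getD x x = x
    · rw [find_fix hfix]
    · have hlt : parent.getD x x < x := Nat.lt_of_le_of_ne (hB x) hfix
      rw [find_step hB hfix]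
      exact le_trans (ih _ hlt) (by omega)

theorem find_is_root {parent : List Nat} (hB : UFB parent) :
    ∀ x, parent.getD (pvFind parent x) (pvFind parent x) = pvFind parent x := by
  intro x
  induction x using Nat.strong_induction_on with
  | _ x ih =>
    by_cases hfix : parent.getD x x = x
    · rw [find_fix hfix]; exact hfix
    · have hlt : parent.getD x x < x := Nat.lt_of_le_of_ne (hB x) hfix
      rw [find_step hB hfix]
      exact ih _ hlt

-- the effect of grafting root rb under root ra (ra < rb)
theorem find_set {parent : List Nat} (hB : UFB parent) {ra rb : Nat}
    (hra : parent.getD ra ra = ra) (hrb : parent.getD rb rb = rb)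
    (hlt : ra < rb) (hrbLen : rb < parent.length) :
    (UFB (parent.set rb ra)) ∧
    (∀ x, pvFind (parent.set rb ra) x =
      if pvFind parent x = rb then ra else pvFind parent x) := by
  have hB' : UFB (parent.set rb ra) := by
    intro x
    rw [getD_set_nat hrbLen]
    by_cases h : x = rb
    · subst h; rw [if_pos rfl]; omega
    · rw [if_neg h]; exact hB x
  refine ⟨hB', ?_⟩
  intro x
  induction x using Nat.strong_induction_on with
  | _ x ih =>
    by_cases hxrb : x = rb
    · subst hxrb
      have hgx : (parent.set x ra).getD x x = ra := by
        rw [getD_set_nat hrbLen, if_pos rfl]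
      have hne : (parent.set x ra).getD x x ≠ x := by rw [hgx]; omega
      rw [find_step hB' hne, hgx, ih ra hlt]
      rw [find_fix hra, if_neg (by omega), find_fix hrb, if_pos rfl]
    · have hgx : (parent.set rb ra).getD x x = parent.getD x x := by
        rw [getD_set_nat hrbLen, if_neg hxrb]
      by_cases hfix : parent.getD x x = x
      · rw [find_fix (by rw [hgx]; exact hfix), find_fix hfix, if_neg hxrb]
      · have hlt2 : parent.getD x x < x := Nat.lt_of_le_of_ne (hB x) hfix
        rw [find_step hB' (by rw [hgx]; exact hfix), hgx, ih _ hlt2,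
          find_step hB hfix]

-- the merged equivalence relation
def mergeR (R : Nat → Nat → Prop) (a b : Nat) (x y : Nat) : Prop :=
  R x y ∨ (R x a ∧ R b y) ∨ (R x b ∧ R a y)

theorem mergeR_equiv {R : Nat → Nat → Prop} (hEq : Equivalence R) (a b : Nat) :
    Equivalence (mergeR R a b) := by
  constructor
  · intro x; exact Or.inl (hEq.refl x)
  · intro x y h
    rcases h with h | ⟨h1, h2⟩ | ⟨h1, h2⟩
    · exact Or.inl (hEq.symm h)
    · exact Or.inr (Or.inr ⟨hEq.symm h2, hEq.symm h1⟩)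
    · exact Or.inr (Or.inl ⟨hEq.symm h2, hEq.symm h1⟩)
  · intro x y z h1 h2
    rcases h1 with h1 | ⟨ha1, hb1⟩ | ⟨ha1, hb1⟩
    · rcases h2 with h2 | ⟨ha2, hb2⟩ | ⟨ha2, hb2⟩
      · exact Or.inl (hEq.trans h1 h2)
      · exact Or.inr (Or.inl ⟨hEq.trans h1 ha2, hb2⟩)
      · exact Or.inr (Or.inr ⟨hEq.trans h1 ha2, hb2⟩)
    · rcases h2 with h2 | ⟨ha2, hb2⟩ | ⟨ha2, hb2⟩
      · exact Or.inr (Or.inl ⟨ha1, hEq.trans hb1 h2⟩)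
      · exact Or.inl (hEq.trans (hEq.trans ha1 (hEq.symm (hEq.trans hb1 ha2))) hb2)
      · exact Or.inl (hEq.trans ha1 hb2)
    · rcases h2 with h2 | ⟨ha2, hb2⟩ | ⟨ha2, hb2⟩
      · exact Or.inr (Or.inr ⟨ha1, hEq.trans hb1 h2⟩)
      · exact Or.inl (hEq.trans ha1 hb2)
      · exact Or.inl (hEq.trans (hEq.trans ha1 (hEq.symm (hEq.trans hb1 ha2))) hb2)

-- what a parent array represents
def Good (N : Nat) (parent : List Nat) (R : Nat → Nat → Prop) : Prop :=
  parent.length = N ∧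
  UFB parent ∧
  (∀ x, R x (pvFind parent x)) ∧
  (∀ x y, R x y → pvFind parent x = pvFind parent y) ∧
  (∀ x y, x < N → y < N → pvFind parent x = pvFind parent y → R x y)

theorem Good_iff {N : Nat} {parent : List Nat} {R R' : Nat → Nat → Prop}
    (h : Good N parent R) (hiff : ∀ x y, R x y ↔ R' x y) : Good N parent R' := by
  obtain ⟨h1, h2, h3, h4, h5⟩ := h
  exact ⟨h1, h2, fun x => (hiff _ _).mp (h3 x),
    fun x y hr => h4 x y ((hiff _ _).mpr hr),
    fun x y hx hy hf => (hiff _ _).mp (h5 x y hx hy hf)⟩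

theorem mergeR_comm {R : Nat → Nat → Prop} (a b x y : Nat) :
    mergeR R b a x y ↔ mergeR R a b x y := by
  unfold mergeR; tauto

theorem union_graft {N : Nat} {parent : List Nat} {R : Nat → Nat → Prop}
    (hG : Good N parent R) (hEq : Equivalence R) {a b : Nat} (ha : a < N) (hb : b < N)
    (h1 : pvFind parent a < pvFind parent b) :
    Good N (parent.set (pvFind parent b) (pvFind parent a)) (mergeR R a b) := by
  obtain ⟨hlen, hB, hRf, hRfind, hfindR⟩ := hG
  have hfb : pvFind parent b < N := by have := find_le hB b; omega
  have hxge : ∀ x, ¬ x < N → pvFind parent x = x := fun x hx => find_of_ge (by omega)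
  obtain ⟨hB', hf'⟩ := find_set hB (find_is_root hB a) (find_is_root hB b) h1 (by omega)
  have hxN : ∀ x, pvFind parent x = pvFind parent b → x < N := by
    intro x hx
    by_contra hxge'
    rw [hxge x hxge'] at hx
    omega
  refine ⟨by simpa using hlen, hB', ?_, ?_, ?_⟩
  · intro x
    rw [hf' x]
    by_cases hx : pvFind parent x = pvFind parent b
    · rw [if_pos hx]
      exact Or.inr (Or.inr ⟨hfindR x b (hxN x hx) hb hx, hRf a⟩)
    · rw [if_neg hx]
      exact Or.inl (hRf x)
  · intro x y hr
    rw [hf' x, hf' y]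
    rcases hr with hr | ⟨hxa, hby⟩ | ⟨hxb, hay⟩
    · rw [hRfind x y hr]
    · have hx : pvFind parent x = pvFind parent a := hRfind x a hxa
      have hy : pvFind parent y = pvFind parent b := (hRfind b y hby).symm
      rw [hx, hy, if_neg (by omega), if_pos rfl]
    · have hx : pvFind parent x = pvFind parent b := hRfind x b hxb
      have hy : pvFind parent y = pvFind parent a := (hRfind a y hay).symm
      rw [hx, hy, if_pos rfl, if_neg (by omega)]
  · intro x y hxlt hylt hf
    rw [hf' x, hf' y] at hf
    by_cases hx : pvFind parent x = pvFind parent b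
    · by_cases hy : pvFind parent y = pvFind parent b
      · exact Or.inl (hEq.trans (hfindR x b hxlt hb hx) (hEq.symm (hfindR y b hylt hb hy)))
      · rw [if_pos hx, if_neg hy] at hf
        have hya : pvFind parent y = pvFind parent a := by omega
        exact Or.inr (Or.inr ⟨hfindR x b hxlt hb hx,
          hEq.symm (hfindR y a hylt ha hya)⟩)
    · by_cases hy : pvFind parent y = pvFind parent b
      · rw [if_neg hx, if_pos hy] at hf
        have hxa : pvFind parent x = pvFind parent a := by omega
        exact Or.inr (Or.inl ⟨hfindR x a hxlt ha hxa,
          hfindR b y hb hylt hy.symm⟩)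
      · rw [if_neg hx, if_neg hy] at hf
        exact Or.inl (hfindR x y hxlt hylt hf)

theorem union_good {N : Nat} {parent : List Nat} {R : Nat → Nat → Prop}
    (hG : Good N parent R) (hEq : Equivalence R) {a b : Nat} (ha : a < N) (hb : b < N) :
    Good N (pvUnion parent a b) (mergeR R a b) := by
  unfold pvUnion
  by_cases h1 : pvFind parent a < pvFind parent b
  · rw [if_pos h1]
    exact union_graft hG hEq ha hb h1
  · rw [if_neg h1]
    by_cases h2 : pvFind parent b < pvFind parent a
    · rw [if_pos h2]
      exact Good_iff (union_graft hG hEq hb ha h2) (fun x y => mergeR_comm a b x y)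
    · rw [if_neg h2]
      have heq : pvFind parent a = pvFind parent b := by omega
      obtain ⟨hlen, hB, hRf, hRfind, hfindR⟩ := hG
      refine ⟨hlen, hB, fun x => Or.inl (hRf x), ?_, ?_⟩
      · intro x y hr
        rcases hr with hr | ⟨hxa, hby⟩ | ⟨hxb, hay⟩
        · exact hRfind x y hr
        · rw [hRfind x a hxa, heq, hRfind b y hby]
        · rw [hRfind x b hxb, ← heq, hRfind a y hay]
      · intro x y hxlt hylt hf
        exact Or.inl (hfindR x y hxlt hylt hf)

-- ---- the processed adjacency pairs and their generated equivalence ----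

def PRP (g : List (List Char)) (row col : Nat) (P : List (Nat × Nat)) (a b : Nat) : Prop :=
  ∃ p ∈ P, pvCell g p.1 p.2 ≠ 'X' ∧ a = p.1 * col + p.2 ∧
    ((p.2 + 1 < col ∧ pvCell g p.1 (p.2 + 1) ≠ 'X' ∧ b = p.1 * col + p.2 + 1) ∨
     (p.1 + 1 < row ∧ pvCell g (p.1 + 1) p.2 ≠ 'X' ∧ b = (p.1 + 1) * col + p.2))

theorem eqvGen_false {x y : Nat} :
    Relation.EqvGen (fun _ _ : Nat => False) x y ↔ x = y := by
  constructor
  · intro h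
    induction h with
    | rel _ _ h => exact absurd h id
    | refl => rfl
    | symm _ _ _ ih => exact ih.symm
    | trans _ _ _ _ _ ih1 ih2 => exact ih1.trans ih2
  · rintro rfl
    exact Relation.EqvGen.refl x

theorem eqvGen_iff {r r' : Nat → Nat → Prop} (h : ∀ x y, r x y ↔ r' x y) {x y : Nat} :
    Relation.EqvGen r x y ↔ Relation.EqvGen r' x y :=
  ⟨Relation.EqvGen.mono (fun a b hr => (h a b).mp hr),
   Relation.EqvGen.mono (fun a b hr => (h a b).mpr hr)⟩

theorem mergeR_iff {R R' : Nat → Nat → Prop} (h : ∀ x y, R x y ↔ R' x y) (a b x y : Nat) :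
    mergeR R a b x y ↔ mergeR R' a b x y := by
  unfold mergeR
  rw [h x y, h x a, h b y, h x b, h a y]

theorem eqvGen_pair {r : Nat → Nat → Prop} {a b x y : Nat} :
    Relation.EqvGen (fun x y => r x y ∨ (x = a ∧ y = b)) x y ↔
      mergeR (Relation.EqvGen r) a b x y := by
  have hEq := Relation.EqvGen.is_equivalence r
  constructor
  · intro h
    induction h with
    | rel u v h =>
      rcases h with h | ⟨rfl, rfl⟩
      · exact Or.inl (Relation.EqvGen.rel _ _ h)
      · exact Or.inr (Or.inl ⟨hEq.refl u, hEq.refl v⟩)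
    | refl u => exact Or.inl (hEq.refl u)
    | symm u v _ ih => exact (mergeR_equiv hEq a b).symm ih
    | trans u v w _ _ ih1 ih2 => exact (mergeR_equiv hEq a b).trans ih1 ih2
  · intro h
    have hmono : ∀ {u v : Nat}, Relation.EqvGen r u v →
        Relation.EqvGen (fun x y => r x y ∨ (x = a ∧ y = b)) u v :=
      fun h => Relation.EqvGen.mono (fun a b hr => Or.inl hr) h
    have hpair : Relation.EqvGen (fun x y => r x y ∨ (x = a ∧ y = b)) a b :=
      Relation.EqvGen.rel _ _ (Or.inr ⟨rfl, rfl⟩)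
    rcases h with h | ⟨h1, h2⟩ | ⟨h1, h2⟩
    · exact hmono h
    · exact Relation.EqvGen.trans _ _ _ (hmono h1)
        (Relation.EqvGen.trans _ _ _ hpair (hmono h2))
    · exact Relation.EqvGen.trans _ _ _ (hmono h1)
        (Relation.EqvGen.trans _ _ _
          (Relation.EqvGen.symm _ _ hpair) (hmono h2))

theorem PRP_append {g : List (List Char)} {row col : Nat} {P : List (Nat × Nat)}
    {cur : Nat × Nat} {x y : Nat} :
    PRP g row col (P ++ [cur]) x y ↔
      PRP g row col P x y ∨
      (pvCell g cur.1 cur.2 ≠ 'X' ∧ x = cur.1 * col + cur.2 ∧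
        ((cur.2 + 1 < col ∧ pvCell g cur.1 (cur.2 + 1) ≠ 'X' ∧ y = cur.1 * col + cur.2 + 1) ∨
         (cur.1 + 1 < row ∧ pvCell g (cur.1 + 1) cur.2 ≠ 'X' ∧ y = (cur.1 + 1) * col + cur.2))) := by
  unfold PRP
  constructor
  · rintro ⟨p, hp, hrest⟩
    rcases List.mem_append.mp hp with h | h
    · exact Or.inl ⟨p, h, hrest⟩
    · simp only [List.mem_singleton] at h
      subst h
      exact Or.inr hrest
  · rintro (⟨p, hp, hrest⟩ | hrest)
    · exact ⟨p, by simp [hp], hrest⟩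
    · exact ⟨cur, by simp, hrest⟩

theorem pos_lt_N {row col : Nat} {p : Nat × Nat} (h1 : p.1 < row) (h2 : p.2 < col) :
    p.1 * col + p.2 < row * col := by
  calc p.1 * col + p.2 < p.1 * col + col := by omega
    _ = (p.1 + 1) * col := by ring
    _ ≤ row * col := Nat.mul_le_mul_right col h1

-- the union-building pass of port B, over the flattened scan
def pvUnionF (g : List (List Char)) (row col : Nat) (par : List Nat) (q : Nat × Nat) :
    List Nat :=
  if pvCell g q.1 q.2 ≠ 'X' then
    let par1 := if q.2 + 1 < col ∧ pvCell g q.1 (q.2 + 1) ≠ 'X' then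
        pvUnion par (q.1 * col + q.2) (q.1 * col + q.2 + 1) else par
    if q.1 + 1 < row ∧ pvCell g (q.1 + 1) q.2 ≠ 'X' then
        pvUnion par1 (q.1 * col + q.2) ((q.1 + 1) * col + q.2) else par1
  else par

theorem union_fold_eq (g : List (List Char)) (row col : Nat) (init : List Nat) :
    (List.range row).foldl (fun par i =>
      (List.range col).foldl (fun (par : List Nat) j =>
        if pvCell g i j ≠ 'X' then
          let par1 := if j + 1 < col ∧ pvCell g i (j+1) ≠ 'X' then
              pvUnion par (i * col + j) (i * col + j + 1) else par
          if i + 1 < row ∧ pvCell g (i+1) j ≠ 'X' then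
              pvUnion par1 (i * col + j) ((i+1) * col + j) else par1
        else par) par) init
    = (scanL row col).foldl (pvUnionF g row col) init := by
  unfold scanL
  rw [List.foldl_flatMap]
  apply PySem.List.foldl_congr_mem
  intro st i _
  rw [List.foldl_map]
  rfl

theorem union_loop {g : List (List Char)} {row col : Nat} :
    ∀ (suffix P : List (Nat × Nat)) (parent : List Nat),
      scanL row col = P ++ suffix →
      Good (row * col) parent (Relation.EqvGen (PRP g row col P)) →
      Good (row * col) (suffix.foldl (pvUnionF g row col) parent)
        (Relation.EqvGen (PRP g row col (P ++ suffix))) := by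
  intro suffix
  induction suffix with
  | nil =>
    intro P parent _ hG
    simpa using hG
  | cons cur rest ih =>
    intro P parent hsplit hG
    have hcur : cur.1 < row ∧ cur.2 < col := by
      have : cur ∈ scanL row col := by rw [hsplit]; simp
      exact mem_scanL.mp this
    have hsplit' : scanL row col = (P ++ [cur]) ++ rest := by rw [hsplit]; simp
    have hEq := Relation.EqvGen.is_equivalence (PRP g row col P)
    have ha : cur.1 * col + cur.2 < row * col := pos_lt_N hcur.1 hcur.2
    rw [List.foldl_cons]
    have happ : P ++ cur :: rest = (P ++ [cur]) ++ rest := by simp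
    rw [happ]
    apply ih (P ++ [cur]) _ hsplit'
    -- one cell's unions preserve the invariant
    unfold pvUnionF
    by_cases hland : pvCell g cur.1 cur.2 ≠ 'X'
    · rw [if_pos hland]
      by_cases hc1 : cur.2 + 1 < col ∧ pvCell g cur.1 (cur.2 + 1) ≠ 'X'
      · rw [if_pos hc1]
        have hb1 : cur.1 * col + cur.2 + 1 < row * col := by
          have := pos_lt_N (p := (cur.1, cur.2 + 1)) hcur.1 hc1.1
          simpa [Nat.add_assoc] using this
        have hG1 : Good (row * col)
            (pvUnion parent (cur.1 * col + cur.2) (cur.1 * col + cur.2 + 1))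
            (mergeR (Relation.EqvGen (PRP g row col P))
              (cur.1 * col + cur.2) (cur.1 * col + cur.2 + 1)) :=
          union_good hG hEq ha hb1
        by_cases hc2 : cur.1 + 1 < row ∧ pvCell g (cur.1 + 1) cur.2 ≠ 'X'
        · rw [if_pos hc2]
          have hb2 : (cur.1 + 1) * col + cur.2 < row * col :=
            pos_lt_N (p := (cur.1 + 1, cur.2)) hc2.1 hcur.2
          have hG2 := union_good hG1 (mergeR_equiv hEq _ _) ha hb2
          apply Good_iff hG2
          intro x y
          rw [show (PRP g row col (P ++ [cur])) =
            (fun x y => (fun x y => PRP g row col P x y ∨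
                (x = cur.1 * col + cur.2 ∧ y = cur.1 * col + cur.2 + 1)) x y ∨
              (x = cur.1 * col + cur.2 ∧ y = (cur.1 + 1) * col + cur.2)) from ?_]
          · rw [eqvGen_pair]
            apply (mergeR_iff (fun x y => eqvGen_pair) _ _ x y).symm.trans
            exact Iff.rfl
          · funext x y
            apply propext
            rw [PRP_append]
            constructor
            · rintro (h | ⟨_, rfl, (⟨_, _, rfl⟩ | ⟨_, _, rfl⟩)⟩)
              · exact Or.inl (Or.inl h)
              · exact Or.inl (Or.inr ⟨rfl, rfl⟩)
              · exact Or.inr ⟨rfl, rfl⟩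
            · rintro ((h | ⟨rfl, rfl⟩) | ⟨rfl, rfl⟩)
              · exact Or.inl h
              · exact Or.inr ⟨hland, rfl, Or.inl ⟨hc1.1, hc1.2, rfl⟩⟩
              · exact Or.inr ⟨hland, rfl, Or.inr ⟨hc2.1, hc2.2, rfl⟩⟩
        · rw [if_neg hc2]
          apply Good_iff hG1
          intro x y
          rw [show (PRP g row col (P ++ [cur])) =
            (fun x y => PRP g row col P x y ∨
              (x = cur.1 * col + cur.2 ∧ y = cur.1 * col + cur.2 + 1)) from ?_]
          · rw [eqvGen_pair]
          · funext x y
            apply propext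
            rw [PRP_append]
            constructor
            · rintro (h | ⟨_, rfl, (⟨_, _, rfl⟩ | ⟨h2a, h2b, rfl⟩)⟩)
              · exact Or.inl h
              · exact Or.inr ⟨rfl, rfl⟩
              · exact absurd ⟨h2a, h2b⟩ hc2
            · rintro (h | ⟨rfl, rfl⟩)
              · exact Or.inl h
              · exact Or.inr ⟨hland, rfl, Or.inl ⟨hc1.1, hc1.2, rfl⟩⟩
      · rw [if_neg hc1]
        by_cases hc2 : cur.1 + 1 < row ∧ pvCell g (cur.1 + 1) cur.2 ≠ 'X'
        · rw [if_pos hc2]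
          have hb2 : (cur.1 + 1) * col + cur.2 < row * col :=
            pos_lt_N (p := (cur.1 + 1, cur.2)) hc2.1 hcur.2
          have hG2 := union_good hG hEq ha hb2
          apply Good_iff hG2
          intro x y
          rw [show (PRP g row col (P ++ [cur])) =
            (fun x y => PRP g row col P x y ∨
              (x = cur.1 * col + cur.2 ∧ y = (cur.1 + 1) * col + cur.2)) from ?_]
          · rw [eqvGen_pair]
          · funext x y
            apply propext
            rw [PRP_append]
            constructor
            · rintro (h | ⟨_, rfl, (⟨h1a, h1b, rfl⟩ | ⟨_, _, rfl⟩)⟩)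
              · exact Or.inl h
              · exact absurd ⟨h1a, h1b⟩ hc1
              · exact Or.inr ⟨rfl, rfl⟩
            · rintro (h | ⟨rfl, rfl⟩)
              · exact Or.inl h
              · exact Or.inr ⟨hland, rfl, Or.inr ⟨hc2.1, hc2.2, rfl⟩⟩
        · rw [if_neg hc2]
          apply Good_iff hG
          intro x y
          apply eqvGen_iff
          intro x y
          rw [PRP_append]
          constructor
          · intro h; exact Or.inl h
          · rintro (h | ⟨_, rfl, (⟨h1a, h1b, rfl⟩ | ⟨h2a, h2b, rfl⟩)⟩)
            · exact h
            · exact absurd ⟨h1a, h1b⟩ hc1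
            · exact absurd ⟨h2a, h2b⟩ hc2
    · rw [if_neg hland]
      apply Good_iff hG
      intro x y
      apply eqvGen_iff
      intro x y
      rw [PRP_append]
      constructor
      · intro h; exact Or.inl h
      · rintro (h | ⟨hl, _⟩)
        · exact h
        · exact absurd hl hland

-- ---- correspondence between the pair relation and grid connectivity ----

theorem prp_adj {g : List (List Char)} {row col : Nat} {a b : Nat}
    (h : PRP g row col (scanL row col) a b) :
    ∃ p q : Nat × Nat, (p.1 < row ∧ p.2 < col) ∧ (q.1 < row ∧ q.2 < col) ∧
      a = p.1 * col + p.2 ∧ b = q.1 * col + q.2 ∧ Adj g row col p q := by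
  obtain ⟨p, hp, hl, rfl, hcase⟩ := h
  have hpv := mem_scanL.mp hp
  rcases hcase with ⟨h1, h2, rfl⟩ | ⟨h1, h2, rfl⟩
  · refine ⟨p, (p.1, p.2 + 1), hpv, ⟨hpv.1, h1⟩, rfl, by ring_nf, ?_⟩
    exact ⟨hpv.1, hpv.2, hpv.1, h1, hl, h2, Or.inl ⟨rfl, Or.inl rfl⟩⟩
  · refine ⟨p, (p.1 + 1, p.2), hpv, ⟨h1, hpv.2⟩, rfl, rfl, ?_⟩
    exact ⟨hpv.1, hpv.2, h1, hpv.2, hl, h2, Or.inr ⟨rfl, Or.inl rfl⟩⟩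

theorem adj_prp {g : List (List Char)} {row col : Nat} {p q : Nat × Nat}
    (hadj : Adj g row col p q) :
    Relation.EqvGen (PRP g row col (scanL row col)) (p.1 * col + p.2) (q.1 * col + q.2) := by
  obtain ⟨hp1, hp2, hq1, hq2, hlp, hlq, hgeo⟩ := hadj
  rcases hgeo with ⟨h1, h2 | h2⟩ | ⟨h1, h2 | h2⟩
  · apply Relation.EqvGen.rel
    refine ⟨p, mem_scanL.mpr ⟨hp1, hp2⟩, hlp, rfl, Or.inl ⟨by omega, ?_,
      by rw [show q.1 = p.1 from h1.symm]; omega⟩⟩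
    rw [show p.2 + 1 = q.2 from h2, show p.1 = q.1 from h1]
    exact hlq
  · apply Relation.EqvGen.symm
    apply Relation.EqvGen.rel
    refine ⟨q, mem_scanL.mpr ⟨hq1, hq2⟩, hlq, rfl, Or.inl ⟨by omega, ?_,
      by rw [show p.1 = q.1 from h1]; omega⟩⟩
    rw [show q.2 + 1 = p.2 from h2, show q.1 = p.1 from h1.symm]
    exact hlp
  · apply Relation.EqvGen.rel
    refine ⟨p, mem_scanL.mpr ⟨hp1, hp2⟩, hlp, rfl, Or.inr ⟨by omega, ?_,
      by rw [show q.1 = p.1 + 1 from h2.symm]; omega⟩⟩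
    rw [show p.1 + 1 = q.1 from h2, show p.2 = q.2 from h1]
    exact hlq
  · apply Relation.EqvGen.symm
    apply Relation.EqvGen.rel
    refine ⟨q, mem_scanL.mpr ⟨hq1, hq2⟩, hlq, rfl, Or.inr ⟨by omega, ?_,
      by rw [show p.1 = q.1 + 1 from h2.symm]; omega⟩⟩
    rw [show q.1 + 1 = p.1 from h2, show q.2 = p.2 from h1.symm]
    exact hlp

theorem conn_R {g : List (List Char)} {row col : Nat} {p q : Nat × Nat}
    (hc : Conn g row col p q) :
    Relation.EqvGen (PRP g row col (scanL row col)) (p.1 * col + p.2) (q.1 * col + q.2) := by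
  induction hc with
  | refl => exact Relation.EqvGen.refl _
  | tail _ hadj ih => exact Relation.EqvGen.trans _ _ _ ih (adj_prp hadj)

theorem R_conn {g : List (List Char)} {row col : Nat} {a b : Nat}
    (h : Relation.EqvGen (PRP g row col (scanL row col)) a b) :
    a = b ∨ ∃ p q : Nat × Nat, (p.1 < row ∧ p.2 < col) ∧ (q.1 < row ∧ q.2 < col) ∧
      a = p.1 * col + p.2 ∧ b = q.1 * col + q.2 ∧ Conn g row col p q := by
  induction h with
  | rel u v h =>
    obtain ⟨p, q, hpv, hqv, ha, hb, hadj⟩ := prp_adj h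
    exact Or.inr ⟨p, q, hpv, hqv, ha, hb, Relation.ReflTransGen.single hadj⟩
  | refl u => exact Or.inl rfl
  | symm u v _ ih =>
    rcases ih with h | ⟨p, q, hpv, hqv, ha, hb, hc⟩
    · exact Or.inl h.symm
    · exact Or.inr ⟨q, p, hqv, hpv, hb, ha, conn_symm hc⟩
  | trans u v w _ _ ih1 ih2 =>
    rcases ih1 with h1 | ⟨p, q, hpv, hqv, ha, hb, hc⟩
    · rcases ih2 with h2 | h2
      · exact Or.inl (h1.trans h2)
      · rw [h1]; exact Or.inr h2
    · rcases ih2 with h2 | ⟨p', q', hpv', hqv', ha', hb', hc'⟩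
      · rw [← h2]; exact Or.inr ⟨p, q, hpv, hqv, ha, hb, hc⟩
      · have hqq : q = p' := by
          apply pos_inj (col := col) hqv.2 hpv'.2
          unfold pvPos; omega
        subst hqq
        exact Or.inr ⟨p, q', hpv, hqv', ha, hb', conn_trans hc hc'⟩

theorem rep_unique {g : List (List Char)} {row col : Nat} {r r' : Nat × Nat}
    (h1 : IsRep g row col r) (h2 : IsRep g row col r') (hc : Conn g row col r r') :
    r = r' := by
  have ha := h1.2.2.2 r' hc
  have hb := h2.2.2.2 r (conn_symm hc)
  exact pos_inj (col := col) h1.2.1 h2.2.1 (by unfold pvPos at *; omega)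

-- the union-find root of a land cell is its component's scan-first cell
theorem root_spec {g : List (List Char)} {row col : Nat} {parentF : List Nat}
    (hG : Good (row * col) parentF (Relation.EqvGen (PRP g row col (scanL row col))))
    {p : Nat × Nat} (hp1 : p.1 < row) (hp2 : p.2 < col) (hpl : pvCell g p.1 p.2 ≠ 'X') :
    ∃ r, IsRep g row col r ∧ Conn g row col p r ∧
      pvFind parentF (p.1 * col + p.2) = r.1 * col + r.2 := by
  obtain ⟨hlen, hB, hRf, hRfind, hfindR⟩ := hG
  have hR := hRf (p.1 * col + p.2)
  have hmin : ∀ r : Nat × Nat, Conn g row col p r →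
      pvFind parentF (r.1 * col + r.2) = pvFind parentF (p.1 * col + p.2) := by
    intro r hr
    exact (hRfind _ _ (conn_R hr)).symm
  rcases R_conn hR with heq | ⟨p', q', hpv', hqv', hpe, hre, hconn⟩
  · refine ⟨p, ⟨hp1, hp2, hpl, ?_⟩, Relation.ReflTransGen.refl, heq.symm⟩
    intro q hq
    rcases conn_dest hq with rfl | hqv
    · omega
    · have := hmin q hq
      have hle := find_le hB (q.1 * col + q.2)
      unfold pvPos
      omega
  · have hpp : p' = p := by
      apply pos_inj (col := col) hpv'.2 hp2
      unfold pvPos; omega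
    subst hpp
    have hlr : q'.1 < row ∧ q'.2 < col ∧ pvCell g q'.1 q'.2 ≠ 'X' :=
      conn_land hconn ⟨hp1, hp2, hpl⟩
    refine ⟨q', ⟨hlr.1, hlr.2.1, hlr.2.2, ?_⟩, hconn, hre⟩
    intro q hq
    rcases conn_dest hq with rfl | hqv
    · omega
    · have h1 := hmin q (conn_trans hconn hq)
      have hle := find_le hB (q.1 * col + q.2)
      unfold pvPos
      omega

-- ---- the summing pass of port B ----

def pvSumF (g : List (List Char)) (_row col : Nat) (parent : List Nat)
    (d : PySem.Dict Nat Int) (q : Nat × Nat) : PySem.Dict Nat Int :=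
  if pvCell g q.1 q.2 ≠ 'X' then
    d.insert (pvFind parent (q.1 * col + q.2))
      (d.getD (pvFind parent (q.1 * col + q.2)) 0 + pvIntChar (pvCell g q.1 q.2))
  else d

theorem sum_fold_eq (g : List (List Char)) (row col : Nat) (parent : List Nat)
    (init : PySem.Dict Nat Int) :
    (List.range row).foldl (fun d i =>
      (List.range col).foldl (fun (d : PySem.Dict Nat Int) j =>
        if pvCell g i j ≠ 'X' then
          let r := pvFind parent (i * col + j)
          d.insert r (d.getD r 0 + pvIntChar (pvCell g i j))
        else d) d) init
    = (scanL row col).foldl (pvSumF g row col parent) init := by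
  unfold scanL
  rw [List.foldl_flatMap]
  apply PySem.List.foldl_congr_mem
  intro st i _
  rw [List.foldl_map]
  rfl

theorem psum_append_single {g : List (List Char)} {row col : Nat} {r : Nat × Nat}
    {P : List (Nat × Nat)} {q : Nat × Nat} :
    psum g row col r (P ++ [q]) =
      psum g row col r P + (if cB (Conn g row col r q) = true then pvVal g q else 0) := by
  unfold psum
  rw [List.filter_append, List.map_append, List.sum_append]
  congr 1
  by_cases h : cB (Conn g row col r q) = true
  · rw [if_pos h, List.filter_cons_of_pos (p := fun q' => cB (Conn g row col r q')) h]
    simp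
  · rw [if_neg h, List.filter_cons_of_neg (p := fun q' => cB (Conn g row col r q')) (by simpa using h)]
    simp

theorem filtered_valid {row col : Nat} {P suffix : List (Nat × Nat)}
    (hsplit : scanL row col = P ++ suffix) :
    ∀ y ∈ P, y.1 < row ∧ y.2 < col := by
  intro y hy
  exact mem_scanL.mp (by rw [hsplit]; exact List.mem_append.mpr (Or.inl hy))

theorem sum_loop {g : List (List Char)} {row col : Nat} {parentF : List Nat}
    (hroot : ∀ p : Nat × Nat, p.1 < row → p.2 < col → pvCell g p.1 p.2 ≠ 'X' →
      ∃ r, IsRep g row col r ∧ Conn g row col p r ∧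
        pvFind parentF (p.1 * col + p.2) = r.1 * col + r.2) :
    ∀ (suffix P : List (Nat × Nat)) (d : PySem.Dict Nat Int),
      scanL row col = P ++ suffix →
      d.items = (P.filter fun y => cB (IsRep g row col y)).map
        (fun r => (r.1 * col + r.2, psum g row col r P)) →
      (suffix.foldl (pvSumF g row col parentF) d).items =
        ((P ++ suffix).filter fun y => cB (IsRep g row col y)).map
          (fun r => (r.1 * col + r.2, psum g row col r (P ++ suffix))) := by
  intro suffix
  induction suffix with
  | nil =>
    intro P d _ hitems
    simpa using hitems
  | cons cur rest ih =>
    intro P d hsplit hitems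
    have hcur : cur.1 < row ∧ cur.2 < col := by
      have : cur ∈ scanL row col := by rw [hsplit]; simp
      exact mem_scanL.mp this
    have hsplit' : scanL row col = (P ++ [cur]) ++ rest := by rw [hsplit]; simp
    have happ : P ++ cur :: rest = (P ++ [cur]) ++ rest := by simp
    have hPv := filtered_valid hsplit
    have hkeys : d.keys = (P.filter fun y => cB (IsRep g row col y)).map
        (fun r => r.1 * col + r.2) := by
      show d.items.map (·.1) = _
      rw [hitems, List.map_map]
      rfl
    have hfnd : (P.filter fun y => cB (IsRep g row col y)).Nodup :=
      scanL_nodup.sublist (by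
        rw [hsplit]
        exact (List.filter_sublist (l := P)).trans (List.sublist_append_left P (cur :: rest)))
    have hknd : d.keys.Nodup := by
      rw [hkeys]
      apply List.Nodup.map_on _ hfnd
      intro x hx y hy hxy
      have hxv := hPv x (List.mem_of_mem_filter hx)
      have hyv := hPv y (List.mem_of_mem_filter hy)
      exact pos_inj (col := col) hxv.2 hyv.2 (by unfold pvPos; omega)
    have hcurP : cur ∉ P := by
      have := scanL_nodup (row := row) (col := col)
      rw [hsplit] at this
      rcases List.nodup_append.mp this with ⟨_, h2, h3⟩
      intro hmem
      exact h3 cur hmem cur (by simp) rfl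
    rw [happ, List.foldl_cons]
    apply ih (P ++ [cur]) _ hsplit'
    -- one cell's contribution
    unfold pvSumF
    by_cases hland : pvCell g cur.1 cur.2 ≠ 'X'
    · rw [if_pos hland]
      obtain ⟨r, hrrep, hrconn, hrfind⟩ := hroot cur hcur.1 hcur.2 hland
      by_cases hreq : r = cur
      · -- cur opens a fresh component: new key appended
        subst hreq
        have hnc : d.contains (pvFind parentF (r.1 * col + r.2)) = false := by
          rw [← Bool.not_eq_true]
          rw [PySem.Dict.contains_iff_mem_keys, hkeys]
          intro hmem
          obtain ⟨r', hr', he⟩ := List.mem_map.mp hmem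
          rw [hrfind] at he
          have hr'v := hPv r' (List.mem_of_mem_filter hr')
          have : r' = r := pos_inj (col := col) hr'v.2 hcur.2 (by unfold pvPos; omega)
          subst this
          exact hcurP (List.mem_of_mem_filter hr')
        rw [PySem.Dict.items_insert_of_not_contains _ _ hnc,
          PySem.Dict.getD_of_not_contains _ _ hnc, hitems]
        rw [List.filter_append, List.map_append]
        have hfc : List.filter (fun y => cB (IsRep g row col y)) [r] = [r] := by
          rw [List.filter_cons_of_pos (p := fun y => cB (IsRep g row col y)) ((cB_iff _).mpr hrrep), List.filter_nil]
        rw [hfc]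
        congr 1
        · -- old entries keep their sums
          apply List.map_congr_left
          intro r' hr'
          have hrep' := (cB_iff _).mp (List.mem_filter.mp hr').2
          have hnc' : ¬ Conn g row col r' r := by
            intro hc
            have := rep_unique hrep' hrrep hc
            subst this
            exact hcurP (List.mem_of_mem_filter hr')
          rw [psum_append_single, if_neg (fun h => hnc' ((cB_iff _).mp h))]
          simp
        · -- the fresh entry
          simp only [List.map_cons, List.map_nil, hrfind]
          have hps : psum g row col r (P ++ [r]) = pvVal g r := by
            rw [psum_append_single, if_pos ((cB_iff (Conn g row col r r)).mpr Relation.ReflTransGen.refl)]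
            have h0 : psum g row col r P = 0 := by
              unfold psum
              have : List.filter (fun q => cB (Conn g row col r q)) P = [] := by
                rw [List.filter_eq_nil_iff]
                intro q hq hc
                have hcq := (cB_iff _).mp hc
                have h1 := hrrep.2.2.2 q hcq
                have h2 := prefix_pos_lt hsplit q hq
                omega
              rw [this]; simp
            rw [h0]; ring
          rw [hps]
          simp [pvVal]
      · -- cur joins the component of an earlier representative r
        have hncur : ¬ IsRep g row col cur := by
          intro hrep
          exact hreq (rep_unique hrrep hrep (conn_symm hrconn))
        have hposlt : pvPos col r < pvPos col cur := by
          have h1 := hrrep.2.2.2 cur (conn_symm hrconn)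
          have hne : pvPos col r ≠ pvPos col cur := by
            intro he
            exact hreq (pos_inj (col := col) hrrep.2.1 hcur.2 he)
          unfold pvPos at *
          omega
        have hrP : r ∈ P := mem_prefix_of_pos_lt hsplit ⟨hrrep.1, hrrep.2.1⟩ hposlt
        have hrF : r ∈ P.filter fun y => cB (IsRep g row col y) :=
          List.mem_filter.mpr ⟨hrP, (cB_iff _).mpr hrrep⟩
        have hmemit : (r.1 * col + r.2, psum g row col r P) ∈ d.items := by
          rw [hitems]
          exact List.mem_map.mpr ⟨r, hrF, rfl⟩
        have hc : d.contains (pvFind parentF (cur.1 * col + cur.2)) = true := by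
          rw [PySem.Dict.contains_iff_mem_keys, hkeys, hrfind]
          exact List.mem_map.mpr ⟨r, hrF, rfl⟩
        have hgd : d.getD (pvFind parentF (cur.1 * col + cur.2)) 0 = psum g row col r P := by
          rw [hrfind]
          exact PySem.Dict.getD_of_mem_items _ hmemit hknd 0
        rw [PySem.Dict.items_insert_of_contains _ _ hc, hitems, List.map_map]
        have hfc : List.filter (fun y => cB (IsRep g row col y)) (P ++ [cur]) =
            List.filter (fun y => cB (IsRep g row col y)) P := by
          rw [List.filter_append]
          have hsing : List.filter (fun y => cB (IsRep g row col y)) [cur] = [] := by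
            rw [List.filter_cons_of_neg (p := fun y => cB (IsRep g row col y)) (by simpa [cB_iff] using hncur), List.filter_nil]
          rw [hsing]; simp
        rw [hfc]
        apply List.map_congr_left
        intro r' hr'
        have hrep' := (cB_iff _).mp (List.mem_filter.mp hr').2
        have hr'v := hPv r' (List.mem_of_mem_filter hr')
        simp only [Function.comp_apply]
        by_cases hrr : r' = r
        · subst hrr
          rw [if_pos (by rw [hrfind]; exact beq_self_eq_true _), hgd, hrfind,
            psum_append_single, if_pos ((cB_iff _).mpr (conn_symm hrconn))]
          rfl
        · have hne : (r'.1 * col + r'.2 == pvFind parentF (cur.1 * col + cur.2)) = false := by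
            rw [hrfind, beq_eq_false_iff_ne]
            intro he
            exact hrr (pos_inj (col := col) hr'v.2 hrrep.2.1 (by unfold pvPos; omega))
          rw [if_neg (by rw [hne]; exact Bool.false_ne_true)]
          have hnc' : ¬ Conn g row col r' cur := by
            intro hcc
            exact hrr (rep_unique hrep' hrrep (conn_trans hcc hrconn))
          rw [psum_append_single, if_neg (fun h => hnc' ((cB_iff _).mp h))]
          simp
    · rw [if_neg hland]
      rw [hitems]
      have hfc : List.filter (fun y => cB (IsRep g row col y)) (P ++ [cur]) =
          List.filter (fun y => cB (IsRep g row col y)) P := by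
        rw [List.filter_append]
        have hsing : List.filter (fun y => cB (IsRep g row col y)) [cur] = [] := by
          rw [List.filter_cons_of_neg (p := fun y => cB (IsRep g row col y)) (by
            simp only [Bool.not_eq_true]
            rw [← Bool.not_eq_true]
            intro hrep
            exact hland ((cB_iff _).mp hrep).2.2.1), List.filter_nil]
        rw [hsing]; simp
      rw [hfc]
      apply List.map_congr_left
      intro r' hr'
      have hrep' := (cB_iff _).mp (List.mem_filter.mp hr').2
      have hnc' : ¬ Conn g row col r' cur := by
        intro hcc
        rcases conn_dest hcc with rfl | hv
        · exact hland hrep'.2.2.1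
        · exact hland hv.2.2
      rw [psum_append_single, if_neg (fun h => hnc' ((cB_iff _).mp h))]
      simp

-- ---- assembling port B ----

theorem range_getD {N x : Nat} : (List.range N).getD x x = x := by
  by_cases h : x < N
  · simp [List.getD_eq_getElem?_getD, h]
  · rw [List.getD_eq_default _ _ (by simpa using h)]

theorem good_init {g : List (List Char)} {row col : Nat} :
    Good (row * col) (List.range (row * col)) (Relation.EqvGen (PRP g row col [])) := by
  have hfr : ∀ x, pvFind (List.range (row * col)) x = x := fun x => find_fix range_getD
  have hiff : ∀ x y, Relation.EqvGen (PRP g row col []) x y ↔ x = y := by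
    intro x y
    rw [eqvGen_iff (r' := fun _ _ => False) (by
      intro x y
      simp only [iff_false]
      rintro ⟨p, hp, _⟩
      exact absurd hp (List.not_mem_nil))]
    exact eqvGen_false
  refine ⟨List.length_range, fun x => by rw [range_getD], ?_, ?_, ?_⟩
  · intro x
    rw [hfr x]
    exact Relation.EqvGen.refl x
  · intro x y h
    rw [(hiff x y).mp h]
  · intro x y _ _ h
    rw [hfr x, hfr y] at h
    exact (hiff x y).mpr h

theorem solutionB_canon (maps : List String) :
    solution_alt maps =
      (if canon (pvGrid maps) maps.length ((pvGrid maps).headD []).length ≠ [] then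
        PySem.List.sorted (canon (pvGrid maps) maps.length ((pvGrid maps).headD []).length)
          (fun x => x) false
      else [-1]) := by
  have hG0 := good_init (g := pvGrid maps) (row := maps.length)
    (col := ((pvGrid maps).headD []).length)
  have hGF := union_loop (scanL maps.length ((pvGrid maps).headD []).length) []
    (List.range (maps.length * ((pvGrid maps).headD []).length)) (by simp) hG0
  rw [List.nil_append] at hGF
  have hroot := fun (p : Nat × Nat) hp1 hp2 hpl => root_spec hGF (p := p) hp1 hp2 hpl
  have hsum := sum_loop hroot (scanL maps.length ((pvGrid maps).headD []).length) []
    PySem.Dict.empty (by simp) (by rfl)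
  rw [List.nil_append] at hsum
  -- unfold the port to the two flattened passes
  have hrfl : solution_alt maps =
      (let values := PySem.List.sorted
        ((List.range maps.length).foldl (fun d i =>
          (List.range ((pvGrid maps).headD []).length).foldl
            (fun (d : PySem.Dict Nat Int) j =>
              if pvCell (pvGrid maps) i j ≠ 'X' then
                let r := pvFind
                  ((List.range maps.length).foldl (fun par i =>
                    (List.range ((pvGrid maps).headD []).length).foldl
                      (fun (par : List Nat) j =>
                        if pvCell (pvGrid maps) i j ≠ 'X' then
                          let par1 := if j + 1 < ((pvGrid maps).headD []).length ∧
                              pvCell (pvGrid maps) i (j+1) ≠ 'X' then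
                            pvUnion par (i * ((pvGrid maps).headD []).length + j)
                              (i * ((pvGrid maps).headD []).length + j + 1) else par
                          if i + 1 < maps.length ∧ pvCell (pvGrid maps) (i+1) j ≠ 'X' then
                            pvUnion par1 (i * ((pvGrid maps).headD []).length + j)
                              ((i+1) * ((pvGrid maps).headD []).length + j) else par1
                        else par) par)
                    (List.range (maps.length * ((pvGrid maps).headD []).length)))
                  (i * ((pvGrid maps).headD []).length + j)
                d.insert r (d.getD r 0 + pvIntChar (pvCell (pvGrid maps) i j))
              else d) d)
          PySem.Dict.empty).values (fun x => x) false
      if values ≠ [] then values else [-1]) := rfl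
  rw [hrfl]
  rw [union_fold_eq, sum_fold_eq]
  have hvals : ((scanL maps.length ((pvGrid maps).headD []).length).foldl
      (pvSumF (pvGrid maps) maps.length ((pvGrid maps).headD []).length
        ((scanL maps.length ((pvGrid maps).headD []).length).foldl
          (pvUnionF (pvGrid maps) maps.length ((pvGrid maps).headD []).length)
          (List.range (maps.length * ((pvGrid maps).headD []).length))))
      PySem.Dict.empty).values =
      canon (pvGrid maps) maps.length ((pvGrid maps).headD []).length := by
    show (_ : PySem.Dict Nat Int).items.map (·.2) = _
    rw [hsum, List.map_map]
    rfl
  rw [hvals]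
  by_cases hc : canon (pvGrid maps) maps.length ((pvGrid maps).headD []).length = []
  · rw [hc]
    rfl
  · have hs : PySem.List.sorted
        (canon (pvGrid maps) maps.length ((pvGrid maps).headD []).length)
        (fun x => x) false ≠ [] := by
      rw [Ne, PySem.List.sorted_eq_nil_iff]
      exact hc
    rw [if_pos hs, if_pos hc]

-- ===== VERDICT -- ===== VERDICT (by name: the statement is the Claim_ definition above) =====
theorem solution_spec : Claim_equal_solution := by
  intro maps _ _
  unfold Spec_solution
  rw [solutionA_canon, solutionB_canon]
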